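/- GENERATED by mk_final_copies.py from the proof of the farm's unit `start_decoder.9` (farm:start_decoder.9.2: Lemmas.lean) as the
   re-elaboration sweep compiled it — do not edit. -/
import Asan.CheckWalk
import Vorbis.Spec.Units.start_decoder_9
import Vorbis.Spec.StartDecoderATest

/-!
  Lemmas of unit `start_decoder.9` that are NOT specific to this segment: every segment of start_decoder's part 1 (`.2` … `.9`)
  has to carry `Real.SD len k` and the common part `Frame` over the footprints of the packet readers, `error`, `crc32_init` and its
  own spills. The frozen tree has the per-group two-address lemmas (`HeaderOK.transfer`, `CommentsOK.transfer`, `ArenaOK.transfer`,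
  `SDFrameConsts.frame`, `ZeroRange.frame`) but no lemma for the whole point; these are they, for `k = 2`.
  Then the segment itself, ONE LEMMA PER PIECE between the cut assertions `Body9At` (cut71, cut76, cut77, cut78) and `Mid79` (cut79):
  `seg9a` `seg9b` `seg9c` (one round of loop 3737) `seg9d` `seg9e_fail` `seg9e1` `seg9e2`; work/Proof.lean chains them.
-/

open X86 X86.User Asan Vorbis Vorbis.Spec Vorbis.Spec.StartDecoder

set_option maxRecDepth 4000
set_option maxHeartbeats 4000000

namespace Vorbis.Spec.start_decoder_9

/-- The windows of `*f` that no callee of part 1 except the allocator writes: everything but `stream` `[48,56)`, `p_first`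
`[84,96)`, `eof` + `error` `[136,144)` and the paging / bit-reader fields `[1484,1749)`, `[1752,1784)`. -/
def sd2KeptWins : Wins := [(0, 48), (56, 84), (96, 136), (144, 1484), (1749, 1752), (1784, 1808)]

/-- **A window a part-1 callee may write** without disturbing `SD 2`: inside a reader / error window of `*f` or off `*f`; off the
compiler constants `[R + 8, R + 28H)`; off the arena's buffer (where the comment blocks are). -/
def OKWin (Ar : Arena) (f R : Nat) (w : Span) : Prop :=
  (w.hi ≤ f ∨ f + 1808 ≤ w.lo ∨ (f + 48 ≤ w.lo ∧ w.hi ≤ f + 56) ∨ (f + 84 ≤ w.lo ∧ w.hi ≤ f + 96) ∨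
    (f + 136 ≤ w.lo ∧ w.hi ≤ f + 144) ∨ (f + 1484 ≤ w.lo ∧ w.hi ≤ f + 1749) ∨ (f + 1752 ≤ w.lo ∧ w.hi ≤ f + 1784)) ∧
  (w.hi ≤ R + 8 ∨ R + 0x28 ≤ w.lo) ∧
  (w.hi ≤ Ar.B ∨ Ar.B + Ar.L ≤ w.lo)

/-- The kept windows of `*f` read the same after stores into allowed windows. -/
theorem objEq_kept {Ar : Arena} {mem mem' : Mem} {f R : Nat} {ws : List Span} (hs : Mem.SameExcept ws mem mem')
    (hf : f + 1808 ≤ 2 ^ 64) (hw : ∀ w, w ∈ ws → OKWin Ar f R w) : ObjEq sd2KeptWins mem f mem' f := by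
  apply ObjEq.of_sameExcept hs
  · intro w' hw'
    simp only [sd2KeptWins, List.mem_cons, List.mem_nil_iff, or_false] at hw'
    rcases hw' with rfl | rfl | rfl | rfl | rfl | rfl <;> simp only [] <;> omega
  · intro w' hw' s hsp
    have h1 := (hw s hsp).1
    simp only [sd2KeptWins, List.mem_cons, List.mem_nil_iff, or_false] at hw'
    rcases hw' with rfl | rfl | rfl | rfl | rfl | rfl <;> simp only [] <;> omega

/-- **CM1 – CM3 over the arena's own blocks, carried over stores into allowed windows** (the comment blocks lie in the arena's
buffer, which no allowed window meets). -/
theorem comments_carry {A : Arena × List Obj} {Blk : Block → Prop} {mem mem' : Mem} {f R : Nat} {ws : List Span}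
    (harena : ArenaOK A.1 A.2 mem f) (hown : CommentsOK A.1.Blk mem f) (hc : CommentsOK Blk mem f)
    (hs : Mem.SameExcept ws mem mem') (hf : f + 1808 ≤ 2 ^ 64) (hw : ∀ w, w ∈ ws → OKWin A.1 f R w) :
    CommentsOK Blk mem' f := by
  have he := objEq_kept hs hf hw
  refine hc.transfer (he.sub (by decide)) ?_ (fun _ _ hb => hb)
  intro B hR
  have hin := arena_inside harena (hown.reads_blk hR)
  have hb := harena.bounds
  refine Block.Kept.of_sameExcept hs ?_ (by omega)
  intro w hw'
  have h3 := (hw w hw').2.2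
  omega

/-- **`SD 2` carried over a batch of stores into allowed windows** (the footprints of start_packet, get8_packet, get_bits,
crc32_init, error, vorbis_validate and the segment's own spills and `header[i]` stores), given `Bits` in the new memory (the
readers' posts chain it) and no store to the shadow. `hown`: CM1 – CM3 over the arena's own blocks (`Body9.own`). -/
theorem sd2_carry {len : Nat} {A : Arena × List Obj} {Blk : Block → Prop} {Live : Nat → Prop} {mem mem' : Mem} {f R : Nat}
    {ws : List Span} (h : Real.SD len 2 A Blk Live mem f R) (hown : CommentsOK A.1.Blk mem f)
    (hs : Mem.SameExcept ws mem mem') (hun : ShadowUntouched mem mem') (hb : Bits Blk len mem' f)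
    (hf : f + 1808 ≤ 2 ^ 64) (hR : R + 0x28 ≤ 2 ^ 64) (hw : ∀ w, w ∈ ws → OKWin A.1 f R w) :
    Real.SD len 2 A Blk Live mem' f R ∧ CommentsOK A.1.Blk mem' f := by
  have he := objEq_kept hs hf hw
  have harena : ArenaOK A.1 A.2 mem f := h.arena
  have hcm := comments_carry harena hown (h.comment (by omega)) hs hf hw
  have hcm' := comments_carry harena hown hown hs hf hw
  refine ⟨?_, hcm'⟩
  refine SDw.toSD (k := 2) ?_ (by omega) h.noTemps (fun h1 => absurd h1 (by omega)) (fun _ => hcm)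
  refine
    { env := h.env.eqOn hun
      frame := ?_
      arena := harena.transfer (he.sub (by decide))
      setups := h.setups
      bits := hb
      first := ?_
      discard0 := ?_
      header := fun h1 => HeaderOK.transfer (h.header h1) (he.sub (by decide))
      cb0 := fun h3 => absurd h3 (by omega)
      rest := ?_ }
  · -- the compiler constants ONE20 / Z10 / Z24 and the shadow index
    refine h.frame.frame ?_ hR
    apply hs.eqOn
    intro w hw'
    have h2 := (hw w hw').2.1
    omega
  · -- first_decode
    have e := h.first
    simp only [vacc, voff] at e ⊢
    rw [he.u8 1749 (by decide)]
    exact e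
  · -- discard_samples_deferred
    have e := h.discard0
    simp only [vacc, voff] at e ⊢
    rw [he.i32 1784 (by decide)]
    exact e
  · -- the zero rest
    have hr : RestZero mem f (restFrom 2) := h.rest
    unfold RestZero at hr ⊢
    have e2 : restFrom 2 = 160 := by
      unfold restFrom
      simp only [voff]
      decide
    rw [e2] at hr ⊢
    simp only [voff] at hr ⊢
    refine hr.frame ?_ (by omega)
    apply hs.eqOn
    intro w hw'
    have h1 := (hw w hw').1
    omega

/-- **A window a segment of part 1 may write without disturbing the common part `Frame`** (besides the shadow, which is a
hypothesis of its own): inside the function's footprint — the stack below the saved registers, `*f`, `crc_table` — and off the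
shadow-index slot `[R + 8, R + 10H)`. -/
def FrameWin (g : Ghost) (w : Span) : Prop :=
  ((g.RA - depth ≤ w.lo ∧ w.hi ≤ g.R + 0x598 ∧ (w.hi ≤ g.R + 8 ∨ g.R + 16 ≤ w.lo)) ∨
    (g.f ≤ w.lo ∧ w.hi ≤ g.f + 1808 ∧ g.RA + 8 ≤ g.f) ∨
    (g.f ≤ w.lo ∧ w.hi ≤ g.f + 1808 ∧ (g.f + 1808 ≤ 0x700000 ∨ 0x800000 ≤ g.f) ∧
      (g.f + 1808 ≤ 0x120640 ∨ 0x120650 ≤ g.f)) ∨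
    (0x121c00 ≤ w.lo ∧ w.hi ≤ 0x121c00 + 1024))

/-- **The common part `Frame` at another point of the same segment**: the memory differs from the one at `v` only inside
`FrameWin` windows, no shadow byte was written, the ghost arena is the same. rip, rsp, the code and the ABI invariant of the new
state are given. -/
theorem frame_carry {u₀ : State} {g : Ghost} {pc pc' : Word} {A : Arena × List Obj} {v s : State} {ws : List Span}
    (h : Frame u₀ g pc A v) (hs : Mem.SameExcept ws v.mem s.mem) (hun : ShadowUntouched v.mem s.mem)
    (hrip : s.rip = pc') (hrsp : s.reg .rsp = addr g.R) (hcode : CodeOK u₀ s.mem) (hinv : abiInv s)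
    (hw : ∀ w, w ∈ ws → FrameWin g w) : Frame u₀ g pc' A s := by
  obtain ⟨hRA, hR8⟩ := h.r_eq
  obtain ⟨_, hroom, htop⟩ := h.ra
  simp only [depth, steady] at hRA hroom
  -- a slot of the own frame above the spills reads the same
  have hslot : ∀ off : Nat, (off = 8 ∨ 0x598 ≤ off) → off + 8 ≤ 0x5d0 → s.mem.u64 (g.R + off) = v.mem.u64 (g.R + off) := by
    intro off ho1 ho2
    unfold Mem.u64
    have e : (addr (g.R + off)).toNat = g.R + off := toNat_addr _ (by omega)
    apply hs.readLE _ _ (by omega)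
    intro w hw'
    rw [e]
    have := hw w hw'
    unfold FrameWin at this
    simp only [depth] at this
    omega
  refine
    { entry := h.entry
      rip := hrip
      rsp := hrsp
      shadowIdx := by rw [hslot 8 (Or.inl rfl) (by omega)]; exact h.shadowIdx
      saved_rbx := by rw [hslot 0x598 (Or.inr (by omega)) (by omega)]; exact h.saved_rbx
      saved_rbp := by rw [hslot 0x5a0 (Or.inr (by omega)) (by omega)]; exact h.saved_rbp
      saved_r12 := by rw [hslot 0x5a8 (Or.inr (by omega)) (by omega)]; exact h.saved_r12
      saved_r13 := by rw [hslot 0x5b0 (Or.inr (by omega)) (by omega)]; exact h.saved_r13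
      saved_r14 := by rw [hslot 0x5b8 (Or.inr (by omega)) (by omega)]; exact h.saved_r14
      saved_r15 := by rw [hslot 0x5c0 (Or.inr (by omega)) (by omega)]; exact h.saved_r15
      saved_ra := by rw [hslot 0x5c8 (Or.inr (by omega)) (by omega)]; exact h.saved_ra
      code := hcode
      inv := hinv
      shadow := h.shadow.untouched hun
      offText := h.offText
      ext := h.ext
      callers := h.callers
      sh7 := ?_
      same := ?_ }
  · -- SH7 for `log2_4`: the table lies in the image, below every allowed window
    intro i hi
    have e : (UInt64.ofNat (Vorbis.Globals.log2_4.beg + i)).toNat = 0x120640 + i := by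
      have e0 : Vorbis.Globals.log2_4.beg = 0x120640 := rfl
      rw [e0]
      exact toNat_addr _ (by omega)
    rw [← h.sh7 i hi]
    apply hs.readLE _ _ (by omega)
    intro w hw'
    rw [e]
    have := hw w hw'
    unfold FrameWin at this
    simp only [depth] at this
    omega
  · -- the function's footprint
    refine h.same.step_same hs ?_
    intro w hw' a h1 h2
    have hk := hw w hw'
    unfold FrameWin at hk
    unfold StartDecoder.footprint writes
    have eRA : g.RA = (g.e.reg .rsp).toNat := rfl
    have ef : g.f = (g.e.reg .rdi).toNat := rfl
    rcases hk with hk | hk | hk | hk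
    · refine ⟨_, List.mem_cons_self, ?_, ?_⟩
      · simp only []
        omega
      · simp only []
        omega
    · refine ⟨_, List.mem_cons_of_mem _ List.mem_cons_self, ?_, ?_⟩
      · simp only [vblock, voff]
        omega
      · simp only [vblock, voff]
        omega
    · refine ⟨_, List.mem_cons_of_mem _ List.mem_cons_self, ?_, ?_⟩
      · simp only [vblock, voff]
        omega
      · simp only [vblock, voff]
        omega
    · refine ⟨_, List.mem_cons_of_mem _ (List.mem_cons_of_mem _ List.mem_cons_self), ?_, ?_⟩
      · simp only []
        omega
      · simp only []
        omega

/-- **Where everything is**, as one arithmetic fact for `omega` (what the window conditions `OKWin` / `FrameWin` of the exits are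
proved from): the steady stack pointer, `*f` (a stack object of a CALLER's frame, or off the stack; apart from the globals
`log2_4` and `crc_table`; outside the arena's buffer), the arena's buffer (off the stack, off `crc_table`). -/
theorem layout_facts {u₀ : State} {g : Ghost} {pc : Word} {A : Arena × List Obj} {v : State} {k : Nat}
    (hfr : Frame u₀ g pc A v) (hh : g.Hand A) (hsd : Real.SD g.len k A (g.Blk A) (g.Live A) v.mem g.f g.R) :
    g.R + 1480 = g.RA ∧ g.R % 8 = 0 ∧ 0x700000 + 1888 ≤ g.RA ∧ g.RA + 8 ≤ 0x800000 ∧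
    (g.RA + 8 ≤ g.f ∨ g.f + 1808 ≤ 0x700000 ∨ 0x800000 ≤ g.f) ∧ 0x119d40 ≤ g.f ∧ g.f + 1808 ≤ 0xC00000 ∧
    (g.f + 1808 ≤ 0x120640 ∨ 0x120650 ≤ g.f) ∧ (g.f + 1808 ≤ 0x121c00 ∨ 0x122000 ≤ g.f) ∧
    (g.f + 1808 ≤ A.1.B ∨ A.1.B + A.1.L ≤ g.f) ∧
    (A.1.B + A.1.L ≤ 0x700000 ∨ 0x800000 ≤ A.1.B) ∧ (0x122000 ≤ A.1.B ∨ A.1.B + A.1.L ≤ 0x121c00) ∧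
    A.1.B + A.1.L ≤ 0xC00000 ∧ 0x100000 ≤ A.1.B := by
  obtain ⟨hRA, hR8⟩ := hfr.r_eq
  obtain ⟨hra8, hroom, htop⟩ := hfr.ra
  simp only [depth, steady] at hRA hroom
  have harena : ArenaOK A.1 A.2 v.mem g.f := hsd.arena
  have h1 := harena.AR1
  have h1x := harena.AR1x
  have hobjOut := hh.objOut
  simp only [voff] at hobjOut
  -- `*f` in the data space
  have hwf := (hh.obj.mono (sub_frames' g A)).where_ hfr.shadow hfr.offText (by decide)
  simp only [voff] at hwf
  -- `*f` against the own stack frame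
  have hstack : g.RA + 8 ≤ g.f ∨ g.f + 1808 ≤ 0x700000 ∨ 0x800000 ≤ g.f := by
    obtain ⟨o, ho, k1, k2⟩ := hh.obj
    simp only [voff] at k2
    rcases List.mem_append.mp ho with hs | hoth
    · left
      unfold stackObjs at hs
      obtain ⟨bF, hbF, hin⟩ := List.mem_flatMap.mp hs
      have hmem : bF ∈ g.frames' := List.mem_cons_of_mem _ hbF
      obtain ⟨a1, a2, _, _, _⟩ := hfr.shadow.stack.active bF hmem
      have hg := FrameLayout.objsAt_gran a1 a2 hin
      have e1 : o.gLo = o.base / 8 := rfl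
      have hc := hfr.callers bF hbF
      omega
    · right
      have hoff := hfr.shadow.off o hoth
      unfold OffStack at hoff
      omega
  -- `*f` against the two globals: allocated blocks of different sizes are disjoint
  have hok : BlkOK (g.Blk A) := hsd.env.ok
  have hbf : g.Blk A (objBlock g.f) := (Bits.ob1 hsd.bits).blk
  have hlog : g.Blk A ⟨0x120640, 16⟩ := by
    apply runBlk_extra
    simp only [fixedBlocks, globalBlocks, List.mem_cons, true_or, or_true]
  have hcrc : g.Blk A ⟨0x121c00, 1024⟩ := by
    apply runBlk_extra
    simp only [fixedBlocks, globalBlocks, List.mem_cons, true_or, or_true]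
  have hd1 : g.f + 1808 ≤ 0x120640 ∨ 0x120650 ≤ g.f := by
    rcases hok.apart _ _ hbf hlog with e | hd
    · have e2 := congrArg Block.size e
      simp only [vblock, voff] at e2
      omega
    · simp only [vblock, voff] at hd
      omega
  have hd2 : g.f + 1808 ≤ 0x121c00 ∨ 0x122000 ≤ g.f := by
    rcases hok.apart _ _ hbf hcrc with e | hd
    · have e2 := congrArg Block.size e
      simp only [vblock, voff] at e2
      omega
    · simp only [vblock, voff] at hd
      omega
  -- the arena against `crc_table`
  have hout := hh.outside ⟨0x121c00, 1024⟩ (by simp only [fixedBlocks, globalBlocks, List.mem_cons, true_or, or_true])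
  simp only [] at hout
  have eRA : g.RA = (g.e.reg .rsp).toNat := rfl
  omega

/-- **The windows a path of segment `.9` writes before the allocation** (a literal list in `RA`, `f`: what `u_same` proves of the
walker's memory): the stack below the steady stack pointer (return addresses, the callees' frames), the frame object `header`
`[R + A0H, R + A6H)`, the readers' and `error`'s windows of `*f`, `crc_table`. -/
def Wmax (RA f : Nat) : List Span :=
  [⟨RA - 1888, RA - 1480⟩, ⟨RA - 1320, RA - 1314⟩,
   ⟨f + 48, f + 56⟩, ⟨f + 84, f + 96⟩, ⟨f + 136, f + 144⟩, ⟨f + 1484, f + 1749⟩, ⟨f + 1752, f + 1784⟩,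
   ⟨0x121c00, 0x121c00 + 1024⟩]

/-- Every window of `Wmax` is allowed for `SD 2` and for `Frame`. -/
theorem wmax_ok {u₀ : State} {g : Ghost} {pc : Word} {A : Arena × List Obj} {v : State} {k : Nat}
    (hfr : Frame u₀ g pc A v) (hh : g.Hand A) (hsd : Real.SD g.len k A (g.Blk A) (g.Live A) v.mem g.f g.R) :
    ∀ w, w ∈ Wmax g.RA g.f → OKWin A.1 g.f g.R w ∧ FrameWin g w := by
  obtain ⟨hRA, hR8, hroom, htop, hfstack, hflo, hfhi, hflog, hfcrc, hfout, hAstack, hAcrc, hAhi, hAlo⟩ :=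
    layout_facts hfr hh hsd
  intro w hw
  unfold Wmax at hw
  simp only [List.mem_cons, List.mem_nil_iff, or_false] at hw
  unfold OKWin FrameWin
  simp only [depth]
  rcases hw with rfl | rfl | rfl | rfl | rfl | rfl | rfl | rfl
  all_goals simp only []
  all_goals omega

/-- **`Bits` over stores that miss the four windows `Bits` reads** (`error`'s `[f+140, f+144)`, the allocator's `[f+8, f+12)` and
`[f+128, f+132)`, `codebook_count`, `codebooks`, anything off `*f`). -/
theorem bits_miss {Blk : Block → Prop} {len : Nat} {mem mem' : Mem} {f : Nat} {ws : List Span} (h : Bits Blk len mem f)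
    (hs : Mem.SameExcept ws mem mem')
    (hoff : ∀ w, w ∈ ws → w.hi ≤ f + 48 ∨ (f + 72 ≤ w.lo ∧ w.hi ≤ f + 1488) ∨ f + 1772 ≤ w.lo) : Bits Blk len mem' f := by
  apply h.frame_fields
  apply Bits.SameFields.of_sameExcept hs
  all_goals
    intro w hw
    have := hoff w hw
    omega

/-- **The frame object `header`** (6 bytes at `[R + A0H]` = base + 80 of `Frames.start_decoder`) is a live object inside the
function: the object of the store check 0x1141e6 and of `vorbis_validate`'s precondition. -/
theorem header_obj (g : Ghost) (A : Arena × List Obj) :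
    (⟨g.base + 80, 6, .stack⟩ : Obj) ∈ stackObjs g.frames' ++ A.2 := by
  apply List.mem_append_left
  unfold Ghost.frames'
  rw [stackObjs_cons]
  apply List.mem_append_left
  unfold FrameLayout.objsAt
  apply List.mem_map.mpr
  refine ⟨⟨"header", 80, 6⟩, ?_, rfl⟩
  simp only [Vorbis.Frames.start_decoder, List.mem_cons, true_or, or_true]

/-- The loop counter of loop 3737 as a signed 32-bit number. -/
theorem counter_toInt : ∀ k, k ≤ 6 → (Word.part .w32 (UInt64.ofNat k)).toInt = (k : Int) := by
  decide

/-- `movsxd r12, r13d` of the loop counter. -/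
theorem counter_sext : ∀ k, k ≤ 6 →
    Word.ofBV (BitVec.signExtend 64 (Word.part .w32 (UInt64.ofNat k))) = UInt64.ofNat k := by
  decide

/-- `add r13d, 1` of the loop counter. -/
theorem counter_succ : ∀ k, k ≤ 5 → Word.ofBV (Word.part .w32 (UInt64.ofNat k) + 1#32) = UInt64.ofNat (k + 1) := by
  decide

set_option maxRecDepth 100000 in
/-- `lea r13d, [rax + 1]` for `rax = get_bits(f, 8) < 256`: the codebook count. -/
theorem cnt_toNat : ∀ k, k < 256 → (BitVec.setWidth 32 (UInt64.ofNat k + 1).toBitVec).toNat = k + 1 := by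
  decide

set_option maxRecDepth 100000 in
/-- `imul esi, r13d, 0x848`: the size of the codebooks block, `2120 · count ≤ 542720` (no 32-bit overflow). -/
theorem sz_toNat : ∀ k, k < 256 →
    (Word.ofBV (BitVec.setWidth 32 (UInt64.ofNat k + 1).toBitVec * 2120#32)).toNat = 2120 * (k + 1) := by
  decide

set_option maxRecDepth 100000 in
/-- `movsxd rdx, [f->codebook_count] ; imul rdx, rdx, 0x848`: the length of the memset, `2120 · count`. -/
theorem rdx_toNat : ∀ k, k < 256 →
    (Word.ofBV (BitVec.signExtend 64 (BitVec.ofNat 32 (k + 1))) * 2120).toNat = 2120 * (k + 1) := by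
  decide

/-- **PROPOSED CUT ASSERTION of a split of segment `.9`** (the cut points 0x114199 = `cut71`, 0x1141f7 = `cut76` with `r13 = i ≤ 6`
in addition, 0x11420a = `cut77`): `Body9` at another program counter, without `bytes_in_seg = 0` — `SD 2` survives everything the
segment does before the store of `codebook_count` (0x11422f): the readers', `error`'s and `crc32_init`'s footprints, `header[i]`. -/
structure Body9At (u₀ : State) (g : Ghost) (pc : Word) (A : Arena × List Obj) (v : State) : Prop where
  frame : Frame u₀ g pc A v
  hand : g.Hand A
  rbp : v.reg .rbp = addr g.f
  sd : Real.SD g.len 2 A (g.Blk A) (g.Live A) v.mem g.f g.R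
  own : Own 2 A.1.Blk v.mem g.f

/-- The entry assertion is the cut assertion at `pc_9`. -/
theorem Body9At.of_body9 {u₀ : State} {g : Ghost} {A : Arena × List Obj} {v : State} (h : Body9 u₀ g A v) :
    Body9At u₀ g pc_9 A v :=
  ⟨h.frame, h.hand, h.rbp, h.sd, h.own⟩

/-- **An error exit of segment `.9` before the allocation** (`je 113b22` after start_packet; the stubs 0x1141bf, 0x114415 after
`error`): the epilogue's assertion `AtERR` with eax = 0 and SD.ERR, from the cut assertion `Body9At` the path started at, the footprint since
(inside `Wmax`), `Bits` in the present memory and the machine facts of the present state. -/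
theorem err_exit {u₀ : State} {g : Ghost} {pc : Word} {A : Arena × List Obj} {v s : State} (hb : Body9At u₀ g pc A v)
    (hs : Mem.SameExcept (Wmax g.RA g.f) v.mem s.mem) (hun : ShadowUntouched v.mem s.mem)
    (hbits : Bits (g.Blk A) g.len s.mem g.f) (hrip : s.rip = pc_ERR) (hrsp : s.reg .rsp = addr g.R)
    (hcode : CodeOK u₀ s.mem) (hinv : abiInv s) (hrax : (s.reg .rax).toNat % 2 ^ 32 = 0) : AtERR u₀ g s := by
  have hlay := layout_facts hb.frame hb.hand hb.sd
  have hw := wmax_ok hb.frame hb.hand hb.sd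
  have hsd := (sd2_carry hb.sd (hb.own.comment (by omega)) hs hun hbits (by omega) (by omega) (fun w hw' => (hw w hw').1)).1
  exact ⟨A, frame_carry hb.frame hs hun hrip hrsp hcode hinv (fun w hw' => (hw w hw').2), hb.hand,
    Or.inl ⟨hrax, Failed.of_sd hsd⟩⟩

/-- **`Bits` over stores that all lie off `*f`** (a return address, the frame of `crc32_init` and its `crc_table`, the frame of
`vorbis_validate`): any list of windows (`Reader.bits_of_window` is the one-window case). -/
theorem bits_off {Blk : Block → Prop} {len : Nat} {mem mem' : Mem} {f : Nat} {ws : List Span} (h : Bits Blk len mem f)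
    (hs : Mem.SameExcept ws mem mem') (hoff : ∀ w, w ∈ ws → w.hi ≤ f ∨ f + 1808 ≤ w.lo) : Bits Blk len mem' f := by
  apply h.frame_fields
  apply Bits.SameFields.of_sameExcept hs
  all_goals
    intro w hw
    have := hoff w hw
    omega

/-- **The cut assertion at a later point of the segment**, from the entry assertion, the footprint so far (inside `Wmax`),
`Bits` in the present memory and the machine facts of the present state. -/
theorem mid_exit {u₀ : State} {g : Ghost} {pc pc' : Word} {A : Arena × List Obj} {v s : State} (hb : Body9At u₀ g pc A v)
    (hs : Mem.SameExcept (Wmax g.RA g.f) v.mem s.mem) (hun : ShadowUntouched v.mem s.mem)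
    (hbits : Bits (g.Blk A) g.len s.mem g.f) (hrip : s.rip = pc') (hrsp : s.reg .rsp = addr g.R)
    (hcode : CodeOK u₀ s.mem) (hinv : abiInv s) (hrbp : s.reg .rbp = addr g.f) : Body9At u₀ g pc' A s := by
  have hlay := layout_facts hb.frame hb.hand hb.sd
  have hw := wmax_ok hb.frame hb.hand hb.sd
  obtain ⟨hsd, hcm⟩ :=
    sd2_carry hb.sd (hb.own.comment (by omega)) hs hun hbits (by omega) (by omega) (fun w hw' => (hw w hw').1)
  refine ⟨frame_carry hb.frame hs hun hrip hrsp hcode hinv (fun w hw' => (hw w hw').2), hb.hand, hrbp, hsd, ?_⟩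
  exact
    { comment := fun _ => hcm
      cb0 := fun h3 => absurd h3 (by omega)
      nonnull := fun h3 => absurd h3 (by omega)
      books := fun h5 => absurd h5 (by omega)
      floor := fun h6 => absurd h6 (by omega)
      residue := fun h7 => absurd h7 (by omega)
      mapping := fun h8 => absurd h8 (by omega) }

/-- **A window the last part of segment `.9` may write** (after the store of `codebook_count`) without disturbing what survives
of `SD 2`: off `*f` or inside `setup_memory_required` `[8,12)`, `setup_offset` `[128,132)`, `eof` + `error` `[136,144)`,
`codebook_count` … `codebooks` `[160,176)`; off the compiler constants; off the USED part `[B, B + S)` of the arena (where the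
comment blocks are: the new block and the shadow lie above it). -/
def LateWin (Ar : Arena) (f R : Nat) (w : Span) : Prop :=
  (w.hi ≤ f ∨ f + 1808 ≤ w.lo ∨ (f + 8 ≤ w.lo ∧ w.hi ≤ f + 12) ∨ (f + 128 ≤ w.lo ∧ w.hi ≤ f + 132) ∨
    (f + 136 ≤ w.lo ∧ w.hi ≤ f + 144) ∨ (f + 160 ≤ w.lo ∧ w.hi ≤ f + 176)) ∧
  (w.hi ≤ R + 8 ∨ R + 0x28 ≤ w.lo) ∧
  (w.hi ≤ Ar.B ∨ Ar.B + Ar.S ≤ w.lo)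

/-- The windows of `*f` that the last part of the segment keeps (the arena fields `[112,136)` are NOT among them: the allocator
stores `setup_offset`; `ArenaOK` comes from its postcondition). -/
def lateKeptWins : Wins := [(0, 8), (12, 128), (144, 160), (176, 1808)]

/-- **What survives of `SD 2` over the last part of segment `.9`**: the constants, `Bits`, `first_decode`,
`discard_samples_deferred`, HD1 – HD3, CM1 – CM3 (over both block predicates), the zero rest from `floor_count` on. -/
theorem late_parts {len : Nat} {A : Arena × List Obj} {Blk : Block → Prop} {Live : Nat → Prop} {mem mem' : Mem} {f R : Nat}
    {ws : List Span} (h : Real.SD len 2 A Blk Live mem f R) (hown : CommentsOK A.1.Blk mem f)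
    (hs : Mem.SameExcept ws mem mem') (hf : f + 1808 ≤ 2 ^ 64) (hR : R + 0x28 ≤ 2 ^ 64)
    (hw : ∀ w, w ∈ ws → LateWin A.1 f R w) :
    SDFrameConsts 2 mem' R ∧ Bits Blk len mem' f ∧ stb_vorbis.first_decode mem' f = 1 ∧
      stb_vorbis.discard_samples_deferred mem' f = 0 ∧ HeaderOK mem' f ∧ CommentsOK Blk mem' f ∧
      CommentsOK A.1.Blk mem' f ∧ RestZero mem' f Off.stb_vorbis.floor_count := by
  have harena : ArenaOK A.1 A.2 mem f := h.arena
  have he : ObjEq lateKeptWins mem f mem' f := by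
    apply ObjEq.of_sameExcept hs
    · intro w' hw'
      simp only [lateKeptWins, List.mem_cons, List.mem_nil_iff, or_false] at hw'
      rcases hw' with rfl | rfl | rfl | rfl <;> simp only [] <;> omega
    · intro w' hw' s hsp
      have h1 := (hw s hsp).1
      simp only [lateKeptWins, List.mem_cons, List.mem_nil_iff, or_false] at hw'
      rcases hw' with rfl | rfl | rfl | rfl <;> simp only [] <;> omega
  have hkept : ∀ B, CommentsOK.Reads mem f B → B.Kept mem mem' := by
    intro B hR'
    have hB : A.1.Block B.base B.size := hown.reads_blk hR'
    have hr := harena.block_range hB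
    have hl := le_r8 B.size
    have hb := harena.bounds
    refine Block.Kept.of_sameExcept hs ?_ (by omega)
    intro w hw'
    have h3 := (hw w hw').2.2
    omega
  refine ⟨?_, ?_, ?_, ?_, ?_, ?_, ?_, ?_⟩
  · refine h.frame.frame ?_ hR
    apply hs.eqOn
    intro w hw'
    have h2 := (hw w hw').2.1
    omega
  · refine bits_miss h.bits hs ?_
    intro w hw'
    have h1 := (hw w hw').1
    omega
  · have e := h.first
    simp only [vacc, voff] at e ⊢
    rw [he.u8 1749 (by decide)]
    exact e
  · have e := h.discard0
    simp only [vacc, voff] at e ⊢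
    rw [he.i32 1784 (by decide)]
    exact e
  · exact HeaderOK.transfer (h.header (by omega)) (he.sub (by decide))
  · exact (h.comment (by omega)).transfer (he.sub (by decide)) hkept (fun _ _ hb => hb)
  · exact hown.transfer (he.sub (by decide)) hkept (fun _ _ hb => hb)
  · have hr : RestZero mem f (restFrom 2) := h.rest
    unfold RestZero at hr ⊢
    have e2 : restFrom 2 = 160 := by
      unfold restFrom
      simp only [voff]
      decide
    rw [e2] at hr
    simp only [voff] at hr ⊢
    refine (hr.mono (by omega) (Nat.le_refl _)).frame ?_ (by omega)
    apply hs.eqOn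
    intro w hw'
    have h1 := (hw w hw').1
    omega

/-- **A window the whole of segment `.9` may write without disturbing the memory-level fields of `Frame`**: `FrameWin`, or inside
the arena's buffer, or inside the arena's shadow (both in the function's footprint; both off the stack and off `log2_4`). -/
def FrameWin2 (g : Ghost) (w : Span) : Prop :=
  FrameWin g w ∨
  (g.A0.1.B ≤ w.lo ∧ w.hi ≤ g.A0.1.B + g.A0.1.L ∧ (g.A0.1.B + g.A0.1.L ≤ 0x700000 ∨ 0x800000 ≤ g.A0.1.B) ∧
    (g.A0.1.B + g.A0.1.L ≤ 0x120640 ∨ 0x120650 ≤ g.A0.1.B)) ∨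
  (0xC00000 + g.A0.1.B / 8 ≤ w.lo ∧ w.hi ≤ 0xC00000 + (g.A0.1.B + g.A0.1.L + 7) / 8)

/-- **The common part `Frame` at a later point, for ANOTHER ghost arena / object list** (after `setup_malloc`): the shadow layer,
`offText` and AR7 of the new ghost are given; the memory-level fields are carried over `FrameWin2` windows. -/
theorem frame_carry2 {u₀ : State} {g : Ghost} {pc pc' : Word} {A A' : Arena × List Obj} {v s : State} {ws : List Span}
    (h : Frame u₀ g pc A v) (hs : Mem.SameExcept ws v.mem s.mem)
    (hshadow : ShadowInv A'.2 g.frames' g.R s.mem) (hoff : ∀ o, o ∈ A'.2 → L.textHi ≤ o.base)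
    (hext : g.A0.1.Extends A'.1)
    (hrip : s.rip = pc') (hrsp : s.reg .rsp = addr g.R) (hcode : CodeOK u₀ s.mem) (hinv : abiInv s)
    (hw : ∀ w, w ∈ ws → FrameWin2 g w) : Frame u₀ g pc' A' s := by
  obtain ⟨hRA, hR8⟩ := h.r_eq
  obtain ⟨_, hroom, htop⟩ := h.ra
  simp only [depth, steady] at hRA hroom
  have hslot : ∀ off : Nat, (off = 8 ∨ 0x598 ≤ off) → off + 8 ≤ 0x5d0 → s.mem.u64 (g.R + off) = v.mem.u64 (g.R + off) := by
    intro off ho1 ho2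
    unfold Mem.u64
    have e : (addr (g.R + off)).toNat = g.R + off := toNat_addr _ (by omega)
    apply hs.readLE _ _ (by omega)
    intro w hw'
    rw [e]
    have := hw w hw'
    unfold FrameWin2 FrameWin at this
    simp only [depth] at this
    omega
  refine
    { entry := h.entry
      rip := hrip
      rsp := hrsp
      shadowIdx := by rw [hslot 8 (Or.inl rfl) (by omega)]; exact h.shadowIdx
      saved_rbx := by rw [hslot 0x598 (Or.inr (by omega)) (by omega)]; exact h.saved_rbx
      saved_rbp := by rw [hslot 0x5a0 (Or.inr (by omega)) (by omega)]; exact h.saved_rbp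
      saved_r12 := by rw [hslot 0x5a8 (Or.inr (by omega)) (by omega)]; exact h.saved_r12
      saved_r13 := by rw [hslot 0x5b0 (Or.inr (by omega)) (by omega)]; exact h.saved_r13
      saved_r14 := by rw [hslot 0x5b8 (Or.inr (by omega)) (by omega)]; exact h.saved_r14
      saved_r15 := by rw [hslot 0x5c0 (Or.inr (by omega)) (by omega)]; exact h.saved_r15
      saved_ra := by rw [hslot 0x5c8 (Or.inr (by omega)) (by omega)]; exact h.saved_ra
      code := hcode
      inv := hinv
      shadow := hshadow
      offText := hoff
      ext := hext
      callers := h.callers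
      sh7 := ?_
      same := ?_ }
  · intro i hi
    have e : (UInt64.ofNat (Vorbis.Globals.log2_4.beg + i)).toNat = 0x120640 + i := by
      have e0 : Vorbis.Globals.log2_4.beg = 0x120640 := rfl
      rw [e0]
      exact toNat_addr _ (by omega)
    rw [← h.sh7 i hi]
    apply hs.readLE _ _ (by omega)
    intro w hw'
    rw [e]
    have := hw w hw'
    unfold FrameWin2 FrameWin at this
    simp only [depth] at this
    omega
  · refine h.same.step_same hs ?_
    intro w hw' a h1 h2
    have hk := hw w hw'
    unfold FrameWin2 FrameWin at hk
    unfold StartDecoder.footprint writes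
    have eRA : g.RA = (g.e.reg .rsp).toNat := rfl
    have ef : g.f = (g.e.reg .rdi).toNat := rfl
    rcases hk with (hk | hk | hk | hk) | hk | hk
    · refine ⟨_, List.mem_cons_self, ?_, ?_⟩
      · simp only []
        omega
      · simp only []
        omega
    · refine ⟨_, List.mem_cons_of_mem _ List.mem_cons_self, ?_, ?_⟩
      · simp only [vblock, voff]
        omega
      · simp only [vblock, voff]
        omega
    · refine ⟨_, List.mem_cons_of_mem _ List.mem_cons_self, ?_, ?_⟩
      · simp only [vblock, voff]
        omega
      · simp only [vblock, voff]
        omega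
    · refine ⟨_, List.mem_cons_of_mem _ (List.mem_cons_of_mem _ List.mem_cons_self), ?_, ?_⟩
      · simp only []
        omega
      · simp only []
        omega
    · refine ⟨_, List.mem_cons_of_mem _ (List.mem_cons_of_mem _ (List.mem_cons_of_mem _ List.mem_cons_self)), ?_, ?_⟩
      · simp only []
        omega
      · simp only []
        omega
    · refine ⟨_, List.mem_cons_of_mem _ (List.mem_cons_of_mem _ (List.mem_cons_of_mem _
        (List.mem_cons_of_mem _ List.mem_cons_self))), ?_, ?_⟩
      · simp only [shadowSpan]
        omega
      · simp only [shadowSpan]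
        omega

/-- A window of a footprint on which the two memories are known to agree can be dropped (the shadow window of a failed
`setup_malloc`: its postcondition says the shadow is untouched). -/
theorem sameExcept_drop_last {ws : List Span} {w : Span} {m m' : Mem} (h : Mem.SameExcept (ws ++ [w]) m m')
    (he : Mem.EqOn w.lo w.hi m m') : Mem.SameExcept ws m m' := by
  intro a ha
  by_cases hin : a.toNat < w.lo ∨ w.hi ≤ a.toNat
  · apply h a
    intro w' hw'
    rcases List.mem_append.mp hw' with h1 | h1
    · exact ha w' h1
    · have e : w' = w := List.mem_singleton.mp h1
      rw [e]
      exact hin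
  · exact he a (by omega) (by omega)

/-- No shadow byte is written by a store below the shadow region. -/
theorem untouched_write {m m' : Mem} (h : ShadowUntouched m m') (w : Word) (k x : Nat) (hw : w.toNat + k ≤ 0xC00000) :
    ShadowUntouched m (m'.writeLE w k x) := by
  intro a h1 h2
  have e := Mem.eqOn_writeLE m' w k x 0xC00000 0x200000 (by omega) (Or.inr hw)
  exact (e a h1 (by omega)).trans (h a h1 h2)

/-- **SD.ERR at exit 4 of segment `.9`** (0x114427: `codebook_count` stored, `setup_malloc` returned NULL and NULL was stored to
`codebooks`): neither `SD 2` (its zero rest starts at `codebook_count`) nor `SD 3` (CB0 non-NULL) holds there, so `Failed` is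
built from its parts — H4 from `codebooks = NULL`, H2 / H3 / H5 from the zero rest from `floor_count` on, H1 from CM2. -/
theorem failed_null {g : Ghost} {A : Arena × List Obj} {mem : Mem} (henv : Env (g.Blk A) (g.Live A) mem)
    (hbits : Bits (g.Blk A) g.len mem g.f) (harena : ArenaOK A.1 A.2 mem g.f) (hcm : CommentsOK (g.Blk A) mem g.f)
    (hr : RestZero mem g.f Off.stb_vorbis.floor_count) (hnull : stb_vorbis.codebooks mem g.f = 0) :
    Failed g.len g.f (g.Live A) A mem := by
  have h176r : Off.stb_vorbis.floor_count ≤ Off.stb_vorbis.residue_count := by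
    simp only [voff]
    decide
  have h176m : Off.stb_vorbis.floor_count ≤ Off.stb_vorbis.mapping_count := by
    simp only [voff]
    decide
  refine ⟨⟨henv, ⟨Bits.ob1 hbits, ArenaOK.alloc_buffer_ne_zero harena, hcm.h1, ?_, ?_, H4.of_null hnull, ?_⟩, hbits⟩,
    harena.AR1, ?_⟩
  · exact H2.of_null (hr.residue_null h176r).1
  · exact H3.of_null (hr.residue_null h176r).1
  · exact H5.of_null (hr.mapping_null h176m)
  · intro o ho
    apply harena.AR6 o
    unfold Arena.objs
    exact List.mem_append_left _ ho

/-- **Exit 4 of segment `.9`** (the stub 0x114427 after `error(f, 3)`): the epilogue's assertion from the cut assertion at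
`cut78`, the footprint since (allowed windows, the shadow window of the failed allocation dropped), the allocator's `ArenaOK`
carried to the present memory, `codebooks = NULL`. -/
theorem err4_exit {u₀ : State} {g : Ghost} {pc : Word} {A : Arena × List Obj} {v s : State} {ws : List Span}
    (hb : Body9At u₀ g pc A v) (hs : Mem.SameExcept ws v.mem s.mem) (hwL : ∀ w, w ∈ ws → LateWin A.1 g.f g.R w)
    (hwF : ∀ w, w ∈ ws → FrameWin2 g w) (hun : ShadowUntouched v.mem s.mem) (harena : ArenaOK A.1 A.2 s.mem g.f)
    (hnull : stb_vorbis.codebooks s.mem g.f = 0) (hrip : s.rip = pc_ERR) (hrsp : s.reg .rsp = addr g.R)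
    (hcode : CodeOK u₀ s.mem) (hinv : abiInv s) (hrax : (s.reg .rax).toNat % 2 ^ 32 = 0) : AtERR u₀ g s := by
  have hlay := layout_facts hb.frame hb.hand hb.sd
  obtain ⟨_, hbits, _, _, _, hcm, _, hr⟩ :=
    late_parts hb.sd (hb.own.comment (by omega)) hs (by omega) (by omega) hwL
  exact ⟨A, frame_carry2 hb.frame hs (hb.frame.shadow.untouched hun) hb.frame.offText hb.frame.ext hrip hrsp hcode hinv hwF,
    hb.hand, Or.inl ⟨hrax, failed_null (hb.sd.env.eqOn hun) hbits harena hcm hr hnull⟩⟩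

/-- **The exit `AtC1` of segment `.9`** (0x11428b, after `memset(f->codebooks, 0, 2120 · count)` returned): the hand-over assertion
from the cut assertion at `cut78`, the footprint since (allowed windows), the allocator's postcondition carried to the present
memory (`hsh`, `harena`), the two stored fields and the zero fill. `n` = the result of `get_bits(f, 8)`. -/
theorem c1_exit {u₀ : State} {g : Ghost} {pc : Word} {A : Arena × List Obj} {v s : State} {ws : List Span} (n : Nat)
    (hb : Body9At u₀ g pc A v) (hn : n < 256) (_hfit : A.1.Fits (2120 * (n + 1)))
    (hs : Mem.SameExcept ws v.mem s.mem) (hwL : ∀ w, w ∈ ws → LateWin A.1 g.f g.R w)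
    (hwF : ∀ w, w ∈ ws → FrameWin2 g w)
    (hsh : ShadowInv (A.1.newSetupObj (2120 * (n + 1)) :: A.2) g.frames' g.R s.mem)
    (harena : ArenaOK (A.1.pushSetup (2120 * (n + 1))) (A.1.newSetupObj (2120 * (n + 1)) :: A.2) s.mem g.f)
    (hcnt : s.mem.u32 (g.f + 160) = n + 1) (hcb : s.mem.u64 (g.f + 168) = A.1.B + A.1.S + 32)
    (hzero : ZeroFill s.mem (A.1.B + A.1.S + 32) (2120 * (n + 1)))
    (hrip : s.rip = pc_C1) (hrsp : s.reg .rsp = addr g.R) (hcode : CodeOK u₀ s.mem) (hinv : abiInv s)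
    (hrbp : s.reg .rbp = addr g.f) : AtC1 u₀ g s := by
  have hlay := layout_facts hb.frame hb.hand hb.sd
  obtain ⟨hc, hbits, hfirst, hd, hhd, _, hcm, hr⟩ :=
    late_parts hb.sd (hb.own.comment (by omega)) hs (by omega) (by omega) hwL
  have harena0 : ArenaOK A.1 A.2 v.mem g.f := hb.sd.arena
  -- the new ghost
  refine ⟨(A.1.pushSetup (2120 * (n + 1)), A.1.newSetupObj (2120 * (n + 1)) :: A.2), ?_⟩
  have hextA : A.1.Extends (A.1.pushSetup (2120 * (n + 1))) := A.1.extends_pushSetup _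
  have hhand : g.Hand (A.1.pushSetup (2120 * (n + 1)), A.1.newSetupObj (2120 * (n + 1)) :: A.2) :=
    HandOK.mono hb.hand hextA (fun o ho => List.mem_cons_of_mem _ ho)
  -- the fields
  have ecnt : stb_vorbis.codebook_count s.mem g.f = (n : Int) + 1 := by
    simp only [vacc, voff]
    unfold Mem.i32
    rw [hcnt]
    unfold sint32
    split <;> omega
  have ecb : stb_vorbis.codebooks s.mem g.f = A.1.B + A.1.S + 32 := by
    simp only [vacc, voff]
    exact hcb
  have hne : stb_vorbis.codebooks s.mem g.f ≠ 0 := by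
    rw [ecb]
    omega
  have hF2 : Since A.1 (A.1.pushSetup (2120 * (n + 1)))
      ⟨stb_vorbis.codebooks s.mem g.f, Off.sizeof.Codebook * (stb_vorbis.codebook_count s.mem g.f).toNat⟩ := by
    have h0 := harena0.since_pushSetup (2120 * (n + 1))
    have e1 : Off.sizeof.Codebook * (stb_vorbis.codebook_count s.mem g.f).toNat = 2120 * (n + 1) := by
      rw [ecnt]
      simp only [voff]
      omega
    rw [e1, ecb, Nat.add_assoc]
    exact h0
  have hages : BookTrans A.1 (A.1.pushSetup (2120 * (n + 1))) (A.1.pushSetup (2120 * (n + 1)))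
      (A.1.pushSetup (2120 * (n + 1))) s.mem g.f 0 :=
    BookTrans.zero hextA hcm (by rw [ecnt]; omega) hF2 hne
  have hown := hages.upTo.own
  -- the environment of a check site over the new ghost
  have hsubO : ∀ o, o ∈ stackObjs g.frames' ++ A.2 →
      o ∈ stackObjs g.frames' ++ (A.1.newSetupObj (2120 * (n + 1)) :: A.2) := by
    intro o ho
    rcases List.mem_append.mp ho with h1 | h2
    · exact List.mem_append_left _ h1
    · exact List.mem_append_right _ (List.mem_cons_of_mem _ h2)
  have hxok : BlkOK (listBlk (objBlock g.f :: fixedBlocks g.len)) :=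
    ⟨fun B hB => hb.sd.env.ok.inside B (Or.inr hB), fun B C hB hC => hb.sd.env.ok.apart B C (Or.inr hB) (Or.inr hC)⟩
  have hxlive : BlkLive (listBlk (objBlock g.f :: fixedBlocks g.len))
      (Asan.Live (stackObjs g.frames' ++ (A.1.newSetupObj (2120 * (n + 1)) :: A.2))) := by
    refine BlkLive.mono (BlkLive.sub hb.sd.env.live (fun B hB => Or.inr hB)) ?_
    intro x hx
    obtain ⟨o, ho, hbx⟩ := hx
    exact ⟨o, hsubO o ho, hbx⟩
  have henv : Env (g.Blk (A.1.pushSetup (2120 * (n + 1)), A.1.newSetupObj (2120 * (n + 1)) :: A.2))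
      (g.Live (A.1.pushSetup (2120 * (n + 1)), A.1.newSetupObj (2120 * (n + 1)) :: A.2)) s.mem := by
    refine ⟨hsh.covers, ?_, ?_⟩
    · apply harena.runBlk_ok hxok
      intro C hC
      rcases List.mem_cons.mp hC with rfl | hm
      · exact hhand.objOut
      · exact hhand.outside C hm
    · exact harena.runBlk_live (fun o ho => List.mem_append_right _ ho) hxlive
  -- the zero fill
  have hz : ZF s.mem (stb_vorbis.codebooks s.mem g.f) (stb_vorbis.codebook_count s.mem g.f).toNat 0 := by
    apply ZF.init
    have e1 : Off.sizeof.Codebook * (stb_vorbis.codebook_count s.mem g.f).toNat = 2120 * (n + 1) := by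
      rw [ecnt]
      simp only [voff]
      omega
    rw [e1, ecb]
    exact hzero
  -- the common part
  have hoffT : ∀ o, o ∈ A.1.newSetupObj (2120 * (n + 1)) :: A.2 → L.textHi ≤ o.base := by
    intro o ho
    rcases List.mem_cons.mp ho with rfl | hm
    · have eb : (A.1.newSetupObj (2120 * (n + 1))).base = A.1.B + (A.1.S + 32) := rfl
      have := hb.hand.arenaText
      omega
    · exact hb.frame.offText o hm
  have hfr : Frame u₀ g pc_C1 (A.1.pushSetup (2120 * (n + 1)), A.1.newSetupObj (2120 * (n + 1)) :: A.2) s :=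
    frame_carry2 hb.frame hs hsh hoffT (hb.frame.ext.trans hextA) hrip hrsp hcode hinv hwF
  have hbits' : Bits (g.Blk (A.1.pushSetup (2120 * (n + 1)), A.1.newSetupObj (2120 * (n + 1)) :: A.2)) g.len s.mem g.f := by
    refine hbits.reblk ?_ ?_
    · exact runBlk_extra List.mem_cons_self
    · apply runBlk_extra
      simp only [fixedBlocks, List.mem_cons, true_or, or_true]
  exact
    { frame := hfr
      hand := hhand
      rbp := hrbp
      sd := sd4_of_parts henv hc harena (up g _) hb.sd.noTemps hbits' hfirst hd hhd
        (CommentsOK.reblk (hown.comment (by omega)) (fun B _ hB => up g _ B hB))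
        (CB0.reblk (hown.cb0 (by omega)) (fun B _ hB => up g _ B hB)) hne (by rw [ecnt]; omega) hz hr
      ages := ⟨A.1, hages⟩ }

/-- **THE FIRST PART OF SEGMENT `.9`, PROVED** (0x114184 … 0x114199: `call start_packet ; test eax, eax ; je 113b22 ; call crc32_init`):
from the entry assertion `At9` the machine reaches the epilogue's assertion `AtERR` (start_packet returned 0: exit 1 of the
segment) or the proposed cut assertion `Body9At` at `cut71` = 0x114199. Shows that the lemmas above (`sd2_carry`, `frame_carry`,
`err_exit`, `mid_exit`) do the whole carrying at a call site: what remains per call is the callee's precondition and the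
footprint bookkeeping (`u_same`, `sameExcept_through_callee`, `v_untouched`). 24 s. -/
theorem seg9a (Lay : Layout) (hLay : Lay.hi = 0x1000000) (μ : Microarch) (hμ : UserX.MicroOK μ) (u₀ : State)
    (hcode : HasCodeNat Lay u₀ Vorbis.L.start_decoder.entry Vorbis.Code.code_start_decoder.nat Vorbis.L.start_decoder.size)
    (h_sp : ∀ (others : List Obj) (frames : List (Nat × FrameLayout)) (Blk : Block → Prop) (len : Nat),
      Calls Lay μ Vorbis.WayInv (Vorbis.conv u₀) Vorbis.L.start_packet.entry (Vorbis.Spec.start_packet.spec others frames Blk len))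
    (h_crc : ∀ (others : List Obj) (frames : List (Nat × FrameLayout)),
      Calls Lay μ Vorbis.WayInv (Vorbis.conv u₀) Vorbis.L.crc32_init.entry (Vorbis.Spec.crc32_init.spec others frames))
    (g : Ghost) (v : State) (hat : At9 u₀ g v) :
    ReachVia Lay μ WayInv v (fun w => (∃ A, Body9At u₀ g Vorbis.L.start_decoder.cut71 A w) ∨ AtERR u₀ g w) := by
  obtain ⟨A, hb⟩ := hat
  have he := hb.frame.entry
  v_entry he
  simp only [depth] at he_room he_stack
  have hsp' := h_sp A.2 g.frames' (g.Blk A) g.len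
  have hlay := layout_facts hb.frame hb.hand hb.sd
  have eRA : g.RA = (g.e.reg .rsp).toNat := rfl
  have ef : g.f = (g.e.reg .rdi).toNat := rfl
  rw [eRA, ef] at hlay
  obtain ⟨hRA, hR8, _, _, hfstack, hflo, hfhi, hflog, hfcrc, hfout, hAstack, hAcrc, hAhi, hAlo⟩ := hlay
  have w_rip := hb.frame.rip
  have w_rsp : v.reg .rsp = g.e.reg .rsp - 1480 := by
    rw [hb.frame.rsp]
    apply UInt64.toNat_inj.mp
    rw [toNat_addr _ (by omega)]
    u_omega
  have w_rbp : v.reg .rbp = g.e.reg .rdi := by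
    rw [hb.rbp]
    exact addr_toNat _
  have hRw : g.e.reg .rsp - 1480 = addr g.R := by
    rw [← w_rsp]
    exact hb.frame.rsp
  have c_rsp := w_rsp
  have c_rbp := w_rbp
  have w_eq : Mem.EqOn Vorbis.L.textLo Vorbis.L.textHi u₀.mem v.mem := hb.frame.code
  have hdf : v.flags .df = false := (show abiInv _ from hb.frame.inv).1
  have hmx : v.mxcsr &&& 0x1F80 = 0x1F80 := (show abiInv _ from hb.frame.inv).2
  have hsse := Vorbis.sseOK_of_abiInv hb.frame.inv
  have henvR : ReaderEnv A.2 g.frames' (g.Blk A) g.len g.f := readerEnv hb.hand hb.sd.env.live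
  u_walk hcode [hμ.vendor] span [Vorbis.L.textLo, Vorbis.L.textHi] side (v_side)
  case call_inv =>
    v_inv
  case pre_114187 =>
    have hun : ShadowUntouched v.mem s_114187.mem := by v_untouched
    have hrsp8 : (s_114187.reg .rsp).toNat + 8 = g.R := by
      rw [w_rsp]
      u_omega
    refine ⟨⟨?_, hb.frame.offText⟩, ?_, ?_⟩
    · rw [hrsp8]
      exact hb.frame.shadow.untouched hun
    · rw [w_rdi, ← ef]
      exact henvR
    · rw [w_rdi, ← ef, w_mem]
      have hlt : (g.e.reg Reg.rsp - 1488).toNat + 8 ≤ 2 ^ 64 := by u_omega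
      exact (Reader.store_off_obj hb.sd.bits _ 8 _ hlt (by u_omega)).1.bits
  -- after start_packet (0x11418c)
  v_after_call w_rsp_114187 w_mem_114187
  simp only [w_rdi_114187] at w_same
  have hpost1 : StartPacketPost (g.Blk A) g.len (s_114187.reg .rdi).toNat s_114187 s_114187r := w_post
  rw [w_rdi_114187, ← ef] at hpost1
  obtain ⟨z1, w_rax⟩ : ∃ z, s_114187r.reg .rax = z := ⟨_, rfl⟩
  have hsame1 : Mem.SameExcept
      [⟨(g.e.reg .rsp).toNat - 1888, (g.e.reg .rsp).toNat - 1480⟩,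
       ⟨(g.e.reg .rdi).toNat + 48, (g.e.reg .rdi).toNat + 56⟩, ⟨(g.e.reg .rdi).toNat + 84, (g.e.reg .rdi).toNat + 96⟩,
       ⟨(g.e.reg .rdi).toNat + 136, (g.e.reg .rdi).toNat + 144⟩, ⟨(g.e.reg .rdi).toNat + 1484, (g.e.reg .rdi).toNat + 1749⟩,
       ⟨(g.e.reg .rdi).toNat + 1752, (g.e.reg .rdi).toNat + 1784⟩] v.mem s_114187r.mem := by
    u_same
  have hun1 : ShadowUntouched v.mem s_114187r.mem := by v_untouched
  have hcrc' := h_crc A.2 g.frames'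
  u_walk hcode [hμ.vendor] until [Vorbis.L.start_decoder.cut4] span [Vorbis.L.textLo, Vorbis.L.textHi] side (v_side)
  case cont =>
    -- exit 1 (0x11418e `je 113b22`): start_packet returned 0
    refine ReachVia.done (Or.inr ?_)
    have hsameE : Mem.SameExcept
        [⟨(g.e.reg .rsp).toNat - 1888, (g.e.reg .rsp).toNat - 1480⟩,
         ⟨(g.e.reg .rsp).toNat - 1320, (g.e.reg .rsp).toNat - 1314⟩,
         ⟨(g.e.reg .rdi).toNat + 48, (g.e.reg .rdi).toNat + 56⟩, ⟨(g.e.reg .rdi).toNat + 84, (g.e.reg .rdi).toNat + 96⟩,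
         ⟨(g.e.reg .rdi).toNat + 136, (g.e.reg .rdi).toNat + 144⟩, ⟨(g.e.reg .rdi).toNat + 1484, (g.e.reg .rdi).toNat + 1749⟩,
         ⟨(g.e.reg .rdi).toNat + 1752, (g.e.reg .rdi).toNat + 1784⟩,
         ⟨0x121c00, 0x121c00 + 1024⟩] v.mem s_11418e.mem := by
      rw [w_mem]
      u_same
    have hunE : ShadowUntouched v.mem s_11418e.mem := by
      rw [w_mem]
      exact hun1
    have hbitsE : Bits (g.Blk A) g.len s_11418e.mem g.f := by
      rw [w_mem]
      exact hpost1.reader.bits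
    have hinvE : abiInv s_11418e := by v_inv
    have hraxE : (s_11418e.reg .rax).toNat % 2 ^ 32 = 0 := by
      rw [w_rax, ← Vorbis.toNat_part32]
      exact hbr_11418e
    exact err_exit (Body9At.of_body9 hb) hsameE hunE hbitsE w_rip (by rw [w_rsp]; exact hRw) w_eq hinvE hraxE
  case call_inv =>
    v_inv
  case pre_114194 =>
    -- crc32_init: the shadow clause and `crc_table` as a live object
    have hun : ShadowUntouched v.mem s_114194.mem := by v_untouched
    have hrsp8 : (s_114194.reg .rsp).toNat + 8 = g.R := by
      rw [w_rsp]
      u_omega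
    refine ⟨⟨?_, hb.frame.offText⟩, ?_⟩
    · rw [hrsp8]
      exact hb.frame.shadow.untouched hun
    · exact ⟨_, List.mem_append_right _ hb.hand.g_crc, Nat.le_refl _, Nat.le_refl _⟩
  -- after crc32_init (0x114199)
  v_after_call w_rsp_114194 w_mem_114194
  refine ReachVia.done (Or.inl ⟨A, ?_⟩)
  have hlt : (g.e.reg Reg.rsp - 1488).toNat + 8 ≤ 2 ^ 64 := by u_omega
  have hsameA : Mem.SameExcept
      [⟨(g.e.reg .rsp).toNat - 1888, (g.e.reg .rsp).toNat - 1480⟩,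
       ⟨(g.e.reg .rsp).toNat - 1320, (g.e.reg .rsp).toNat - 1314⟩,
       ⟨(g.e.reg .rdi).toNat + 48, (g.e.reg .rdi).toNat + 56⟩, ⟨(g.e.reg .rdi).toNat + 84, (g.e.reg .rdi).toNat + 96⟩,
       ⟨(g.e.reg .rdi).toNat + 136, (g.e.reg .rdi).toNat + 144⟩, ⟨(g.e.reg .rdi).toNat + 1484, (g.e.reg .rdi).toNat + 1749⟩,
       ⟨(g.e.reg .rdi).toNat + 1752, (g.e.reg .rdi).toNat + 1784⟩,
       ⟨0x121c00, 0x121c00 + 1024⟩] v.mem (s_114187r.mem.writeLE (g.e.reg Reg.rsp - 1488) 8 1130905) := by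
    u_same
  have hsame2 : Mem.SameExcept
      [⟨(g.e.reg .rsp).toNat - 1888, (g.e.reg .rsp).toNat - 1480⟩,
       ⟨(g.e.reg .rsp).toNat - 1320, (g.e.reg .rsp).toNat - 1314⟩,
       ⟨(g.e.reg .rdi).toNat + 48, (g.e.reg .rdi).toNat + 56⟩, ⟨(g.e.reg .rdi).toNat + 84, (g.e.reg .rdi).toNat + 96⟩,
       ⟨(g.e.reg .rdi).toNat + 136, (g.e.reg .rdi).toNat + 144⟩, ⟨(g.e.reg .rdi).toNat + 1484, (g.e.reg .rdi).toNat + 1749⟩,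
       ⟨(g.e.reg .rdi).toNat + 1752, (g.e.reg .rdi).toNat + 1784⟩,
       ⟨0x121c00, 0x121c00 + 1024⟩] v.mem s_114194r.mem := by
    refine Vorbis.Spec.Reader.sameExcept_through_callee hsameA w_same ?_
    simp only [List.forall_mem_cons, List.not_mem_nil, false_imp_iff, implies_true, and_true, X86.User.inSpans_cons,
      X86.User.inSpans_nil, or_false]
    repeat' apply And.intro
    all_goals u_omega
  have hun2 : ShadowUntouched v.mem s_114194r.mem := by v_untouched
  have hbits2 : Bits (g.Blk A) g.len s_114194r.mem g.f := by
    have hb1 := (Reader.store_off_obj hpost1.reader.bits (g.e.reg Reg.rsp - 1488) 8 1130905 hlt (by u_omega)).1.bits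
    refine bits_off hb1 w_same ?_
    simp only [List.forall_mem_cons, List.not_mem_nil, false_imp_iff, implies_true, and_true]
    repeat' apply And.intro
    all_goals u_omega
  have hinv2 : abiInv s_114194r := by v_inv
  have hrbp2 : s_114194r.reg .rbp = addr g.f := by
    rw [w_kept .rbp rfl]
    exact hb.rbp
  exact mid_exit (Body9At.of_body9 hb) hsame2 hun2 hbits2 w_rip (by rw [w_rsp]; exact hRw) w_eq hinv2 hrbp2

/-- **Segment `.9`, part b** (0x114199 … 0x1141ab, stub 0x1141bf): `get8_packet`, the packet type test (`cmp eax, 5`), `error(f, 0x14)`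
on the stub, `i = 0` from the literal-0 slot `[R+24H]` (Z24): from the cut assertion at `cut71` to the loop head `cut76` with
`r13 = 0`, or to the epilogue. -/
theorem seg9b (Lay : Layout) (hLay : Lay.hi = 0x1000000) (μ : Microarch) (hμ : UserX.MicroOK μ) (u₀ : State)
    (hcode : HasCodeNat Lay u₀ Vorbis.L.start_decoder.entry Vorbis.Code.code_start_decoder.nat Vorbis.L.start_decoder.size)
    (h_g8 : ∀ (others : List Obj) (frames : List (Nat × FrameLayout)) (Blk : Block → Prop) (len : Nat),
      Calls Lay μ Vorbis.WayInv (Vorbis.conv u₀) Vorbis.L.get8_packet.entry (Vorbis.Spec.get8_packet.spec others frames Blk len))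
    (h_err : ∀ (others : List Obj) (frames : List (Nat × FrameLayout)),
      Calls Lay μ Vorbis.WayInv (Vorbis.conv u₀) Vorbis.L.error.entry (Vorbis.Spec.error.spec others frames))
    (g : Ghost) (A : Arena × List Obj) (v : State) (hb : Body9At u₀ g Vorbis.L.start_decoder.cut71 A v) :
    ReachVia Lay μ WayInv v (fun w =>
      (∃ A, Body9At u₀ g Vorbis.L.start_decoder.cut76 A w ∧ w.reg .r13 = 0) ∨ AtERR u₀ g w) := by
  have he := hb.frame.entry
  v_entry he
  simp only [depth] at he_room he_stack
  have hlay := layout_facts hb.frame hb.hand hb.sd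
  have eRA : g.RA = (g.e.reg .rsp).toNat := rfl
  have ef : g.f = (g.e.reg .rdi).toNat := rfl
  rw [eRA, ef] at hlay
  obtain ⟨hRA, hR8, _, _, hfstack, hflo, hfhi, hflog, hfcrc, hfout, hAstack, hAcrc, hAhi, hAlo⟩ := hlay
  have w_rip := hb.frame.rip
  have w_rsp : v.reg .rsp = g.e.reg .rsp - 1480 := by
    rw [hb.frame.rsp]
    apply UInt64.toNat_inj.mp
    rw [toNat_addr _ (by omega)]
    u_omega
  have w_rbp : v.reg .rbp = g.e.reg .rdi := by
    rw [hb.rbp]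
    exact addr_toNat _
  have hRw : g.e.reg .rsp - 1480 = addr g.R := by
    rw [← w_rsp]
    exact hb.frame.rsp
  have c_rsp := w_rsp
  have c_rbp := w_rbp
  have w_eq : Mem.EqOn Vorbis.L.textLo Vorbis.L.textHi u₀.mem v.mem := hb.frame.code
  have hdf : v.flags .df = false := (show abiInv _ from hb.frame.inv).1
  have hmx : v.mxcsr &&& 0x1F80 = 0x1F80 := (show abiInv _ from hb.frame.inv).2
  have hsse := Vorbis.sseOK_of_abiInv hb.frame.inv
  have henvR : ReaderEnv A.2 g.frames' (g.Blk A) g.len g.f := readerEnv hb.hand hb.sd.env.live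
  have hobjL : LiveIn A.2 g.frames' g.f Off.sizeof.stb_vorbis := hb.hand.obj.mono (sub_frames' g A)
  have hg8' := h_g8 A.2 g.frames' (g.Blk A) g.len
  have herr' := h_err A.2 g.frames'
  u_walk hcode [hμ.vendor] span [Vorbis.L.textLo, Vorbis.L.textHi] side (v_side)
  case call_inv =>
    v_inv
  case pre_11419c =>
    have hun : ShadowUntouched v.mem s_11419c.mem := by v_untouched
    have hrsp8 : (s_11419c.reg .rsp).toNat + 8 = g.R := by
      rw [w_rsp]
      u_omega
    refine ⟨⟨?_, hb.frame.offText⟩, ?_, ?_⟩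
    · rw [hrsp8]
      exact hb.frame.shadow.untouched hun
    · rw [w_rdi, ← ef]
      exact henvR
    · rw [w_rdi, ← ef, w_mem]
      have hlt : (g.e.reg Reg.rsp - 1488).toNat + 8 ≤ 2 ^ 64 := by u_omega
      exact (Reader.store_off_obj hb.sd.bits _ 8 _ hlt (by u_omega)).1.bits
  -- after get8_packet (0x1141a1)
  v_after_call w_rsp_11419c w_mem_11419c
  simp only [w_rdi_11419c] at w_same
  have hpost1 : Get8PacketPost (g.Blk A) g.len (s_11419c.reg .rdi).toNat s_11419c s_11419cr := w_post
  rw [w_rdi_11419c, ← ef] at hpost1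
  obtain ⟨z1, w_rax⟩ : ∃ z, s_11419cr.reg .rax = z := ⟨_, rfl⟩
  have hun1 : ShadowUntouched v.mem s_11419cr.mem := by v_untouched
  have hsame1 : Mem.SameExcept
      [⟨(g.e.reg .rsp).toNat - 1888, (g.e.reg .rsp).toNat - 1480⟩,
       ⟨(g.e.reg .rsp).toNat - 1320, (g.e.reg .rsp).toNat - 1314⟩,
       ⟨(g.e.reg .rdi).toNat + 48, (g.e.reg .rdi).toNat + 56⟩, ⟨(g.e.reg .rdi).toNat + 84, (g.e.reg .rdi).toNat + 96⟩,
       ⟨(g.e.reg .rdi).toNat + 136, (g.e.reg .rdi).toNat + 144⟩, ⟨(g.e.reg .rdi).toNat + 1484, (g.e.reg .rdi).toNat + 1749⟩,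
       ⟨(g.e.reg .rdi).toNat + 1752, (g.e.reg .rdi).toNat + 1784⟩,
       ⟨0x121c00, 0x121c00 + 1024⟩] v.mem s_11419cr.mem := by
    u_same
  have hbits1 : Bits (g.Blk A) g.len s_11419cr.mem g.f := hpost1.reader.bits
  u_walk hcode [hμ.vendor] until [Vorbis.L.start_decoder.cut4, Vorbis.L.start_decoder.cut76] span [Vorbis.L.textLo, Vorbis.L.textHi] side (v_side)
  case call_inv =>
    v_inv
  case pre_1141c7 =>
    -- error(f, 0x14): the shadow clause and `*f` inside one live object
    have hun : ShadowUntouched v.mem s_1141c7.mem := by v_untouched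
    have hrsp8 : (s_1141c7.reg .rsp).toNat + 8 = g.R := by
      rw [w_rsp]
      u_omega
    refine ⟨⟨?_, hb.frame.offText⟩, ?_⟩
    · rw [hrsp8]
      exact hb.frame.shadow.untouched hun
    · rw [w_rdi, ← ef]
      exact hobjL
  case cont =>
    -- the stub 0x1141bf: after error (0x1141cc)
    v_after_call w_rsp_1141c7 w_mem_1141c7
    simp only [w_rdi_1141c7] at w_same
    have hun2 : ShadowUntouched v.mem s_1141c7r.mem := by v_untouched
    have hlt : (g.e.reg Reg.rsp - 1488).toNat + 8 ≤ 2 ^ 64 := by u_omega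
    have hsameA : Mem.SameExcept
        [⟨(g.e.reg .rsp).toNat - 1888, (g.e.reg .rsp).toNat - 1480⟩,
       ⟨(g.e.reg .rsp).toNat - 1320, (g.e.reg .rsp).toNat - 1314⟩,
       ⟨(g.e.reg .rdi).toNat + 48, (g.e.reg .rdi).toNat + 56⟩, ⟨(g.e.reg .rdi).toNat + 84, (g.e.reg .rdi).toNat + 96⟩,
       ⟨(g.e.reg .rdi).toNat + 136, (g.e.reg .rdi).toNat + 144⟩, ⟨(g.e.reg .rdi).toNat + 1484, (g.e.reg .rdi).toNat + 1749⟩,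
       ⟨(g.e.reg .rdi).toNat + 1752, (g.e.reg .rdi).toNat + 1784⟩,
       ⟨0x121c00, 0x121c00 + 1024⟩] v.mem (s_11419cr.mem.writeLE (g.e.reg Reg.rsp - 1488) 8 1130956) := by
      u_same
    have hsame2 : Mem.SameExcept
        [⟨(g.e.reg .rsp).toNat - 1888, (g.e.reg .rsp).toNat - 1480⟩,
       ⟨(g.e.reg .rsp).toNat - 1320, (g.e.reg .rsp).toNat - 1314⟩,
       ⟨(g.e.reg .rdi).toNat + 48, (g.e.reg .rdi).toNat + 56⟩, ⟨(g.e.reg .rdi).toNat + 84, (g.e.reg .rdi).toNat + 96⟩,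
       ⟨(g.e.reg .rdi).toNat + 136, (g.e.reg .rdi).toNat + 144⟩, ⟨(g.e.reg .rdi).toNat + 1484, (g.e.reg .rdi).toNat + 1749⟩,
       ⟨(g.e.reg .rdi).toNat + 1752, (g.e.reg .rdi).toNat + 1784⟩,
       ⟨0x121c00, 0x121c00 + 1024⟩] v.mem s_1141c7r.mem := by
      refine Vorbis.Spec.Reader.sameExcept_through_callee hsameA w_same ?_
      simp only [List.forall_mem_cons, List.not_mem_nil, false_imp_iff, implies_true, and_true, X86.User.inSpans_cons,
        X86.User.inSpans_nil, or_false]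
      repeat' apply And.intro
      all_goals u_omega
    have hbits2 : Bits (g.Blk A) g.len s_1141c7r.mem g.f := by
      have hb1 := (Reader.store_off_obj hbits1 (g.e.reg Reg.rsp - 1488) 8 1130956 hlt (by u_omega)).1.bits
      refine bits_miss hb1 w_same ?_
      simp only [List.forall_mem_cons, List.not_mem_nil, false_imp_iff, implies_true, and_true]
      repeat' apply And.intro
      all_goals u_omega
    have w_rax : s_1141c7r.reg .rax = 0 := w_post.1
    u_walk hcode [hμ.vendor] until [Vorbis.L.start_decoder.cut4] span [Vorbis.L.textLo, Vorbis.L.textHi] side (v_side)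
    refine ReachVia.done (Or.inr ?_)
    have hsameE : Mem.SameExcept
        [⟨(g.e.reg .rsp).toNat - 1888, (g.e.reg .rsp).toNat - 1480⟩,
       ⟨(g.e.reg .rsp).toNat - 1320, (g.e.reg .rsp).toNat - 1314⟩,
       ⟨(g.e.reg .rdi).toNat + 48, (g.e.reg .rdi).toNat + 56⟩, ⟨(g.e.reg .rdi).toNat + 84, (g.e.reg .rdi).toNat + 96⟩,
       ⟨(g.e.reg .rdi).toNat + 136, (g.e.reg .rdi).toNat + 144⟩, ⟨(g.e.reg .rdi).toNat + 1484, (g.e.reg .rdi).toNat + 1749⟩,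
       ⟨(g.e.reg .rdi).toNat + 1752, (g.e.reg .rdi).toNat + 1784⟩,
       ⟨0x121c00, 0x121c00 + 1024⟩] v.mem s_1141cc.mem := by
      rw [w_mem]
      exact hsame2
    have hinvE : abiInv s_1141cc := by v_inv
    have hraxE : (s_1141cc.reg .rax).toNat % 2 ^ 32 = 0 := by
      rw [w_rax]
      rfl
    exact err_exit hb hsameE (by rw [w_mem]; exact hun2) (by rw [w_mem]; exact hbits2) w_rip
      (by rw [w_rsp]; exact hRw) w_eq hinvE hraxE
  -- the packet type is 5: `i = 0` from the literal-0 slot [R+24H] (Z24), on to the loop head 0x1141f7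
  refine ReachVia.done (Or.inl ⟨A, ?_, ?_⟩)
  · have hsameE : Mem.SameExcept
        [⟨(g.e.reg .rsp).toNat - 1888, (g.e.reg .rsp).toNat - 1480⟩,
       ⟨(g.e.reg .rsp).toNat - 1320, (g.e.reg .rsp).toNat - 1314⟩,
       ⟨(g.e.reg .rdi).toNat + 48, (g.e.reg .rdi).toNat + 56⟩, ⟨(g.e.reg .rdi).toNat + 84, (g.e.reg .rdi).toNat + 96⟩,
       ⟨(g.e.reg .rdi).toNat + 136, (g.e.reg .rdi).toNat + 144⟩, ⟨(g.e.reg .rdi).toNat + 1484, (g.e.reg .rdi).toNat + 1749⟩,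
       ⟨(g.e.reg .rdi).toNat + 1752, (g.e.reg .rdi).toNat + 1784⟩,
       ⟨0x121c00, 0x121c00 + 1024⟩] v.mem s_1141ab.mem := by
      rw [w_mem]
      exact hsame1
    have hinvE : abiInv s_1141ab := by v_inv
    have hrbpE : s_1141ab.reg .rbp = addr g.f := by
      rw [w_kept .rbp rfl]
      exact hb.rbp
    exact mid_exit hb hsameE (by rw [w_mem]; exact hun1) (by rw [w_mem]; exact hbits1) w_rip
      (by rw [w_rsp]; exact hRw) w_eq hinvE hrbpE
  · rw [w_r13]
    have ea : g.e.reg Reg.rsp - 1444 = addr (g.R + 0x24) := by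
      apply UInt64.toNat_inj.mp
      rw [toNat_addr _ (by omega)]
      u_omega
    have hz : s_11419cr.mem.readLE (g.e.reg Reg.rsp - 1444) 4 = 0 := by
      have h0 : v.mem.readLE (addr (g.R + 0x24)) 4 = 0 := hb.sd.frame.z24 (by omega) (by omega)
      rw [ea, ← h0]
      apply hsame1.readLE _ _ (by rw [toNat_addr _ (by omega)]; omega)
      rw [toNat_addr _ (by omega)]
      simp only [List.forall_mem_cons, List.not_mem_nil, false_imp_iff, implies_true, and_true]
      repeat' apply And.intro
      all_goals omega
    rw [hz]
    rfl

/-- **Segment `.9`, part c: ONE ROUND of loop 3737** (head 0x1141f7 = `cut76`; `header[i] = get8_packet(f)` with the store check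
0x1141e6 inside the frame object `header`) back to the head with `i + 1` (the measure `6 - i` decreases), or — `i = 6` — the exit through
`vorbis_validate(header)` to `cut77` = 0x11420a. The loop itself is the induction `seg9c_all` of Proof.lean. -/
theorem seg9c (Lay : Layout) (hLay : Lay.hi = 0x1000000) (μ : Microarch) (hμ : UserX.MicroOK μ) (u₀ : State)
    (hcode : HasCodeNat Lay u₀ Vorbis.L.start_decoder.entry Vorbis.Code.code_start_decoder.nat Vorbis.L.start_decoder.size)
    (h_g8 : ∀ (others : List Obj) (frames : List (Nat × FrameLayout)) (Blk : Block → Prop) (len : Nat),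
      Calls Lay μ Vorbis.WayInv (Vorbis.conv u₀) Vorbis.L.get8_packet.entry (Vorbis.Spec.get8_packet.spec others frames Blk len))
    (h_st1 : Asan.SmallCheck Lay μ Vorbis.WayInv (Vorbis.CodeOK u₀) [.rax, .rdx] 1 Vorbis.L.__asan_store1_noabort.entry)
    (h_vv : ∀ (others : List Obj) (frames : List (Nat × FrameLayout)),
      Calls Lay μ Vorbis.WayInv (Vorbis.conv u₀) Vorbis.L.vorbis_validate.entry (Vorbis.Spec.vorbis_validate.spec others frames))
    (g : Ghost) (A : Arena × List Obj) (v : State) (i : Nat) (hb : Body9At u₀ g Vorbis.L.start_decoder.cut76 A v)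
    (hi : i ≤ 6) (hr13 : v.reg .r13 = UInt64.ofNat i) :
    ReachVia Lay μ WayInv v (fun w =>
      (∃ A j, Body9At u₀ g Vorbis.L.start_decoder.cut76 A w ∧ j ≤ 6 ∧ w.reg .r13 = UInt64.ofNat j ∧ 6 - j < 6 - i) ∨
      (∃ A, Body9At u₀ g Vorbis.L.start_decoder.cut77 A w)) := by
  have he := hb.frame.entry
  v_entry he
  simp only [depth] at he_room he_stack
  have hlay := layout_facts hb.frame hb.hand hb.sd
  have eRA : g.RA = (g.e.reg .rsp).toNat := rfl
  have ef : g.f = (g.e.reg .rdi).toNat := rfl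
  rw [eRA, ef] at hlay
  obtain ⟨hRA, hR8, _, _, hfstack, hflo, hfhi, hflog, hfcrc, hfout, hAstack, hAcrc, hAhi, hAlo⟩ := hlay
  have w_rip := hb.frame.rip
  have w_rsp : v.reg .rsp = g.e.reg .rsp - 1480 := by
    rw [hb.frame.rsp]
    apply UInt64.toNat_inj.mp
    rw [toNat_addr _ (by omega)]
    u_omega
  have w_rbp : v.reg .rbp = g.e.reg .rdi := by
    rw [hb.rbp]
    exact addr_toNat _
  have hRw : g.e.reg .rsp - 1480 = addr g.R := by
    rw [← w_rsp]
    exact hb.frame.rsp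
  have c_rsp := w_rsp
  have c_rbp := w_rbp
  have w_eq : Mem.EqOn Vorbis.L.textLo Vorbis.L.textHi u₀.mem v.mem := hb.frame.code
  have hdf : v.flags .df = false := (show abiInv _ from hb.frame.inv).1
  have hmx : v.mxcsr &&& 0x1F80 = 0x1F80 := (show abiInv _ from hb.frame.inv).2
  have hsse := Vorbis.sseOK_of_abiInv hb.frame.inv
  have henvR : ReaderEnv A.2 g.frames' (g.Blk A) g.len g.f := readerEnv hb.hand hb.sd.env.live
  have hobjL : LiveIn A.2 g.frames' g.f Off.sizeof.stb_vorbis := hb.hand.obj.mono (sub_frames' g A)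
  have w_r13 := hr13
  have hg8' := h_g8 A.2 g.frames' (g.Blk A) g.len
  have hvv' := h_vv A.2 g.frames'
  u_walk hcode [hμ.vendor] until [Vorbis.L.start_decoder.cut76] span [Vorbis.L.textLo, Vorbis.L.textHi] side (v_side)
  case call_inv =>
    v_inv
  case pre_1141d4 =>
    have hun : ShadowUntouched v.mem s_1141d4.mem := by v_untouched
    have hrsp8 : (s_1141d4.reg .rsp).toNat + 8 = g.R := by
      rw [w_rsp]
      u_omega
    refine ⟨⟨?_, hb.frame.offText⟩, ?_, ?_⟩
    · rw [hrsp8]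
      exact hb.frame.shadow.untouched hun
    · rw [w_rdi, ← ef]
      exact henvR
    · rw [w_rdi, ← ef, w_mem]
      have hlt : (g.e.reg Reg.rsp - 1488).toNat + 8 ≤ 2 ^ 64 := by u_omega
      exact (Reader.store_off_obj hb.sd.bits _ 8 _ hlt (by u_omega)).1.bits
  case call_inv =>
    v_inv
  case pre_114205 =>
    -- vorbis_validate(header): the frame object `header`, the global `vorbis`
    have hun : ShadowUntouched v.mem s_114205.mem := by v_untouched
    have hrsp8 : (s_114205.reg .rsp).toNat + 8 = g.R := by
      rw [w_rsp]
      u_omega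
    have hrdi : (s_114205.reg .rdi).toNat = g.base + 80 := by
      rw [w_rdi]
      unfold Ghost.base
      u_omega
    refine ⟨⟨?_, hb.frame.offText⟩, ?_, ?_⟩
    · rw [hrsp8]
      exact hb.frame.shadow.untouched hun
    · rw [hrdi]
      exact ⟨_, header_obj g A, Nat.le_refl _, Nat.le_refl _⟩
    · exact ⟨_, List.mem_append_right _ hb.hand.g_vorbis, Nat.le_refl _, Nat.le_refl _⟩
  case cont =>
    -- the body: after get8_packet (0x1141d9)
    v_after_call w_rsp_1141d4 w_mem_1141d4
    simp only [w_rdi_1141d4] at w_same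
    have hpost1 : Get8PacketPost (g.Blk A) g.len (s_1141d4.reg .rdi).toNat s_1141d4 s_1141d4r := w_post
    rw [w_rdi_1141d4, ← ef] at hpost1
    obtain ⟨z1, w_rax⟩ : ∃ z, s_1141d4r.reg .rax = z := ⟨_, rfl⟩
    have hun1 : ShadowUntouched v.mem s_1141d4r.mem := by v_untouched
    have hsame1 : Mem.SameExcept
        [⟨(g.e.reg .rsp).toNat - 1888, (g.e.reg .rsp).toNat - 1480⟩,
       ⟨(g.e.reg .rsp).toNat - 1320, (g.e.reg .rsp).toNat - 1314⟩,
       ⟨(g.e.reg .rdi).toNat + 48, (g.e.reg .rdi).toNat + 56⟩, ⟨(g.e.reg .rdi).toNat + 84, (g.e.reg .rdi).toNat + 96⟩,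
       ⟨(g.e.reg .rdi).toNat + 136, (g.e.reg .rdi).toNat + 144⟩, ⟨(g.e.reg .rdi).toNat + 1484, (g.e.reg .rdi).toNat + 1749⟩,
       ⟨(g.e.reg .rdi).toNat + 1752, (g.e.reg .rdi).toNat + 1784⟩,
       ⟨0x121c00, 0x121c00 + 1024⟩] v.mem s_1141d4r.mem := by
      u_same
    have hbits1 : Bits (g.Blk A) g.len s_1141d4r.mem g.f := hpost1.reader.bits
    have hi5 : i ≤ 5 := by
      have := counter_toInt i hi
      rw [this] at hbr_1141fb
      have e5 : (5#32).toInt = 5 := by decide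
      omega
    have w_r13 : s_1141d4r.reg .r13 = UInt64.ofNat i := by
      rw [w_kept .r13 rfl]
      exact hr13
    u_walk hcode [hμ.vendor] until [Vorbis.L.start_decoder.cut76] span [Vorbis.L.textLo, Vorbis.L.textHi] side (v_side)
    case check_1141e6 =>
      -- the store `header[i] = …`: inside the frame object `header`, i ≤ 5
      rw [counter_sext i hi]
      have hun' : ShadowUntouched v.mem s_1141e6.mem := by v_untouched
      refine Vorbis.check_small hb.frame.shadow hun' (header_obj g A) (by decide) ?_ ?_
      · show g.base + 80 ≤ _
        unfold Ghost.base
        u_omega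
      · show _ ≤ g.base + 80 + 6
        unfold Ghost.base
        u_omega
    case side_code =>
      rw [counter_sext i hi]
      u_omega
    -- the back edge: the loop head again, with i + 1
    rw [counter_sext i hi] at w_mem
    refine ReachVia.done (Or.inl ⟨A, i + 1, ?_, by omega, ?_, by omega⟩)
    · have hsameE : Mem.SameExcept
          [⟨(g.e.reg .rsp).toNat - 1888, (g.e.reg .rsp).toNat - 1480⟩,
       ⟨(g.e.reg .rsp).toNat - 1320, (g.e.reg .rsp).toNat - 1314⟩,
       ⟨(g.e.reg .rdi).toNat + 48, (g.e.reg .rdi).toNat + 56⟩, ⟨(g.e.reg .rdi).toNat + 84, (g.e.reg .rdi).toNat + 96⟩,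
       ⟨(g.e.reg .rdi).toNat + 136, (g.e.reg .rdi).toNat + 144⟩, ⟨(g.e.reg .rdi).toNat + 1484, (g.e.reg .rdi).toNat + 1749⟩,
       ⟨(g.e.reg .rdi).toNat + 1752, (g.e.reg .rdi).toNat + 1784⟩,
       ⟨0x121c00, 0x121c00 + 1024⟩] v.mem s_1141f3.mem := by
        rw [w_mem]
        u_same
      have hunE : ShadowUntouched v.mem s_1141f3.mem := by v_untouched
      have hbitsE : Bits (g.Blk A) g.len s_1141f3.mem g.f := by
        rw [w_mem]
        have hlt : (g.e.reg Reg.rsp - 1488).toNat + 8 ≤ 2 ^ 64 := by u_omega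
        have hb1 := (Reader.store_off_obj hbits1 (g.e.reg Reg.rsp - 1488) 8 1130987 hlt (by u_omega)).1.bits
        have hlt2 : (g.e.reg Reg.rsp - 1480 + UInt64.ofNat i + 160).toNat + 1 ≤ 2 ^ 64 := by u_omega
        exact (Reader.store_off_obj hb1 _ 1 _ hlt2 (by u_omega)).1.bits
      have hinvE : abiInv s_1141f3 := by v_inv
      have hrbpE : s_1141f3.reg .rbp = addr g.f := by
        rw [w_kept .rbp rfl]
        exact hb.rbp
      exact mid_exit hb hsameE hunE hbitsE w_rip (by rw [w_rsp]; exact hRw) w_eq hinvE hrbpE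
    · rw [w_r13]
      exact counter_succ i hi5
  -- the exit of the loop: after vorbis_validate (0x11420a)
  v_after_call w_rsp_114205 w_mem_114205
  refine ReachVia.done (Or.inr ⟨A, ?_⟩)
  have hun2 : ShadowUntouched v.mem s_114205r.mem := by v_untouched
  have hsame2 : Mem.SameExcept
      [⟨(g.e.reg .rsp).toNat - 1888, (g.e.reg .rsp).toNat - 1480⟩,
       ⟨(g.e.reg .rsp).toNat - 1320, (g.e.reg .rsp).toNat - 1314⟩,
       ⟨(g.e.reg .rdi).toNat + 48, (g.e.reg .rdi).toNat + 56⟩, ⟨(g.e.reg .rdi).toNat + 84, (g.e.reg .rdi).toNat + 96⟩,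
       ⟨(g.e.reg .rdi).toNat + 136, (g.e.reg .rdi).toNat + 144⟩, ⟨(g.e.reg .rdi).toNat + 1484, (g.e.reg .rdi).toNat + 1749⟩,
       ⟨(g.e.reg .rdi).toNat + 1752, (g.e.reg .rdi).toNat + 1784⟩,
       ⟨0x121c00, 0x121c00 + 1024⟩] v.mem s_114205r.mem := by
    u_same
  have hbits2 : Bits (g.Blk A) g.len s_114205r.mem g.f := by
    have hlt : (g.e.reg Reg.rsp - 1488).toNat + 8 ≤ 2 ^ 64 := by u_omega
    have hb1 := (Reader.store_off_obj hb.sd.bits (g.e.reg Reg.rsp - 1488) 8 1131018 hlt (by u_omega)).1.bits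
    refine bits_off hb1 w_same ?_
    simp only [List.forall_mem_cons, List.not_mem_nil, false_imp_iff, implies_true, and_true]
    u_omega
  have hinv2 : abiInv s_114205r := by v_inv
  have hrbp2 : s_114205r.reg .rbp = addr g.f := by
    rw [w_kept .rbp rfl]
    exact hb.rbp
  exact mid_exit hb hsame2 hun2 hbits2 w_rip (by rw [w_rsp]; exact hRw) w_eq hinv2 hrbp2

/-- **Segment `.9`, part d** (0x11420a … 0x11421f, stub 0x114415): the test of `vorbis_validate`'s result, `error(f, 0x14)` on the stub,
`get_bits(f, 8)`: to `cut78` with `rax < 256`, or to the epilogue. -/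
theorem seg9d (Lay : Layout) (hLay : Lay.hi = 0x1000000) (μ : Microarch) (hμ : UserX.MicroOK μ) (u₀ : State)
    (hcode : HasCodeNat Lay u₀ Vorbis.L.start_decoder.entry Vorbis.Code.code_start_decoder.nat Vorbis.L.start_decoder.size)
    (h_err : ∀ (others : List Obj) (frames : List (Nat × FrameLayout)),
      Calls Lay μ Vorbis.WayInv (Vorbis.conv u₀) Vorbis.L.error.entry (Vorbis.Spec.error.spec others frames))
    (h_gb : ∀ (others : List Obj) (frames : List (Nat × FrameLayout)) (Blk : Block → Prop) (len : Nat),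
      Calls Lay μ Vorbis.WayInv (Vorbis.conv u₀) Vorbis.L.get_bits.entry (Vorbis.Spec.get_bits.spec others frames Blk len))
    (g : Ghost) (A : Arena × List Obj) (v : State) (hb : Body9At u₀ g Vorbis.L.start_decoder.cut77 A v) :
    ReachVia Lay μ WayInv v (fun w =>
      (∃ A, Body9At u₀ g Vorbis.L.start_decoder.cut78 A w ∧ (w.reg .rax).toNat < 256) ∨ AtERR u₀ g w) := by
  have he := hb.frame.entry
  v_entry he
  simp only [depth] at he_room he_stack
  have hlay := layout_facts hb.frame hb.hand hb.sd
  have eRA : g.RA = (g.e.reg .rsp).toNat := rfl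
  have ef : g.f = (g.e.reg .rdi).toNat := rfl
  rw [eRA, ef] at hlay
  obtain ⟨hRA, hR8, _, _, hfstack, hflo, hfhi, hflog, hfcrc, hfout, hAstack, hAcrc, hAhi, hAlo⟩ := hlay
  have w_rip := hb.frame.rip
  have w_rsp : v.reg .rsp = g.e.reg .rsp - 1480 := by
    rw [hb.frame.rsp]
    apply UInt64.toNat_inj.mp
    rw [toNat_addr _ (by omega)]
    u_omega
  have w_rbp : v.reg .rbp = g.e.reg .rdi := by
    rw [hb.rbp]
    exact addr_toNat _
  have hRw : g.e.reg .rsp - 1480 = addr g.R := by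
    rw [← w_rsp]
    exact hb.frame.rsp
  have c_rsp := w_rsp
  have c_rbp := w_rbp
  have w_eq : Mem.EqOn Vorbis.L.textLo Vorbis.L.textHi u₀.mem v.mem := hb.frame.code
  have hdf : v.flags .df = false := (show abiInv _ from hb.frame.inv).1
  have hmx : v.mxcsr &&& 0x1F80 = 0x1F80 := (show abiInv _ from hb.frame.inv).2
  have hsse := Vorbis.sseOK_of_abiInv hb.frame.inv
  have henvR : ReaderEnv A.2 g.frames' (g.Blk A) g.len g.f := readerEnv hb.hand hb.sd.env.live
  have hobjL : LiveIn A.2 g.frames' g.f Off.sizeof.stb_vorbis := hb.hand.obj.mono (sub_frames' g A)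
  have herr' := h_err A.2 g.frames'
  have hgb' := h_gb A.2 g.frames' (g.Blk A) g.len
  obtain ⟨z0, w_rax⟩ : ∃ z, v.reg .rax = z := ⟨_, rfl⟩
  u_walk hcode [hμ.vendor] until [Vorbis.L.start_decoder.cut4] span [Vorbis.L.textLo, Vorbis.L.textHi] side (v_side)
  case call_inv =>
    v_inv
  case pre_11441d =>
    -- error(f, 0x14)
    have hun : ShadowUntouched v.mem s_11441d.mem := by v_untouched
    have hrsp8 : (s_11441d.reg .rsp).toNat + 8 = g.R := by
      rw [w_rsp]
      u_omega
    refine ⟨⟨?_, hb.frame.offText⟩, ?_⟩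
    · rw [hrsp8]
      exact hb.frame.shadow.untouched hun
    · rw [w_rdi, ← ef]
      exact hobjL
  case call_inv =>
    v_inv
  case pre_11421a =>
    -- get_bits(f, 8)
    have hun : ShadowUntouched v.mem s_11421a.mem := by v_untouched
    have hrsp8 : (s_11421a.reg .rsp).toNat + 8 = g.R := by
      rw [w_rsp]
      u_omega
    refine ⟨⟨⟨?_, hb.frame.offText⟩, ?_, ?_⟩, ?_⟩
    · rw [hrsp8]
      exact hb.frame.shadow.untouched hun
    · rw [w_rdi, ← ef]
      exact henvR
    · rw [w_rdi, ← ef, w_mem]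
      have hlt : (g.e.reg Reg.rsp - 1488).toNat + 8 ≤ 2 ^ 64 := by u_omega
      exact (Reader.store_off_obj hb.sd.bits _ 8 _ hlt (by u_omega)).1.bits
    · rw [bitsArg_def, w_rsi]
      decide
  case cont =>
    -- the stub 0x114415: after error (0x114422)
    v_after_call w_rsp_11441d w_mem_11441d
    simp only [w_rdi_11441d] at w_same
    have hun2 : ShadowUntouched v.mem s_11441dr.mem := by v_untouched
    have hlt : (g.e.reg Reg.rsp - 1488).toNat + 8 ≤ 2 ^ 64 := by u_omega
    have hsame2 : Mem.SameExcept
        [⟨(g.e.reg .rsp).toNat - 1888, (g.e.reg .rsp).toNat - 1480⟩,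
       ⟨(g.e.reg .rsp).toNat - 1320, (g.e.reg .rsp).toNat - 1314⟩,
       ⟨(g.e.reg .rdi).toNat + 48, (g.e.reg .rdi).toNat + 56⟩, ⟨(g.e.reg .rdi).toNat + 84, (g.e.reg .rdi).toNat + 96⟩,
       ⟨(g.e.reg .rdi).toNat + 136, (g.e.reg .rdi).toNat + 144⟩, ⟨(g.e.reg .rdi).toNat + 1484, (g.e.reg .rdi).toNat + 1749⟩,
       ⟨(g.e.reg .rdi).toNat + 1752, (g.e.reg .rdi).toNat + 1784⟩,
       ⟨0x121c00, 0x121c00 + 1024⟩] v.mem s_11441dr.mem := by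
      u_same
    have hbits2 : Bits (g.Blk A) g.len s_11441dr.mem g.f := by
      have hb1 := (Reader.store_off_obj hb.sd.bits (g.e.reg Reg.rsp - 1488) 8 1131554 hlt (by u_omega)).1.bits
      refine bits_miss hb1 w_same ?_
      simp only [List.forall_mem_cons, List.not_mem_nil, false_imp_iff, implies_true, and_true]
      repeat' apply And.intro
      all_goals u_omega
    have w_rax : s_11441dr.reg .rax = 0 := w_post.1
    u_walk hcode [hμ.vendor] until [Vorbis.L.start_decoder.cut4] span [Vorbis.L.textLo, Vorbis.L.textHi] side (v_side)
    refine ReachVia.done (Or.inr ?_)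
    have hsameE : Mem.SameExcept
        [⟨(g.e.reg .rsp).toNat - 1888, (g.e.reg .rsp).toNat - 1480⟩,
       ⟨(g.e.reg .rsp).toNat - 1320, (g.e.reg .rsp).toNat - 1314⟩,
       ⟨(g.e.reg .rdi).toNat + 48, (g.e.reg .rdi).toNat + 56⟩, ⟨(g.e.reg .rdi).toNat + 84, (g.e.reg .rdi).toNat + 96⟩,
       ⟨(g.e.reg .rdi).toNat + 136, (g.e.reg .rdi).toNat + 144⟩, ⟨(g.e.reg .rdi).toNat + 1484, (g.e.reg .rdi).toNat + 1749⟩,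
       ⟨(g.e.reg .rdi).toNat + 1752, (g.e.reg .rdi).toNat + 1784⟩,
       ⟨0x121c00, 0x121c00 + 1024⟩] v.mem s_114422.mem := by
      rw [w_mem]
      exact hsame2
    have hinvE : abiInv s_114422 := by v_inv
    have hraxE : (s_114422.reg .rax).toNat % 2 ^ 32 = 0 := by
      rw [w_rax]
      rfl
    exact err_exit hb hsameE (by rw [w_mem]; exact hun2) (by rw [w_mem]; exact hbits2) w_rip
      (by rw [w_rsp]; exact hRw) w_eq hinvE hraxE
  -- after get_bits (0x11421f)
  v_after_call w_rsp_11421a w_mem_11421a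
  simp only [w_rdi_11421a] at w_same
  have hpost1 : GetBitsSpecPost (g.Blk A) g.len (s_11421a.reg .rdi).toNat (bitsArg s_11421a) s_11421a s_11421ar := w_post
  rw [w_rdi_11421a, ← ef] at hpost1
  have hn8 : bitsArg s_11421a = 8 := by
    rw [bitsArg_def, w_rsi_11421a]
    decide
  rw [hn8] at hpost1
  have hun1 : ShadowUntouched v.mem s_11421ar.mem := by v_untouched
  have hsame1 : Mem.SameExcept
      [⟨(g.e.reg .rsp).toNat - 1888, (g.e.reg .rsp).toNat - 1480⟩,
       ⟨(g.e.reg .rsp).toNat - 1320, (g.e.reg .rsp).toNat - 1314⟩,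
       ⟨(g.e.reg .rdi).toNat + 48, (g.e.reg .rdi).toNat + 56⟩, ⟨(g.e.reg .rdi).toNat + 84, (g.e.reg .rdi).toNat + 96⟩,
       ⟨(g.e.reg .rdi).toNat + 136, (g.e.reg .rdi).toNat + 144⟩, ⟨(g.e.reg .rdi).toNat + 1484, (g.e.reg .rdi).toNat + 1749⟩,
       ⟨(g.e.reg .rdi).toNat + 1752, (g.e.reg .rdi).toNat + 1784⟩,
       ⟨0x121c00, 0x121c00 + 1024⟩] v.mem s_11421ar.mem := by
    u_same
  have hinv1 : abiInv s_11421ar := by v_inv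
  have hrbp1 : s_11421ar.reg .rbp = addr g.f := by
    rw [w_kept .rbp rfl]
    exact hb.rbp
  refine ReachVia.done (Or.inl ⟨A, ?_, ?_⟩)
  · exact mid_exit hb hsame1 hun1 hpost1.bits.bits w_rip (by rw [w_rsp]; exact hRw) w_eq hinv1 hrbp1
  · have := hpost1.bits.result.2 (by omega)
    omega

/-- **Segment `.9`, part e, THE ALLOCATION FAILS** (0x11421f … 0x11425e, stub 0x114427): the stores of `codebook_count` and of the NULL
`codebooks`, `setup_malloc` refusing (`¬ Fits`), `error(f, 3)`: exit 4, to the epilogue (`err4_exit`). -/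
theorem seg9e_fail (Lay : Layout) (hLay : Lay.hi = 0x1000000) (μ : Microarch) (hμ : UserX.MicroOK μ) (u₀ : State)
    (hcode : HasCodeNat Lay u₀ Vorbis.L.start_decoder.entry Vorbis.Code.code_start_decoder.nat Vorbis.L.start_decoder.size)
    (h_err : ∀ (others : List Obj) (frames : List (Nat × FrameLayout)),
      Calls Lay μ Vorbis.WayInv (Vorbis.conv u₀) Vorbis.L.error.entry (Vorbis.Spec.error.spec others frames))
    (h_st4 : Asan.SmallCheck Lay μ Vorbis.WayInv (Vorbis.CodeOK u₀) [.rax, .rcx, .rdx] 4 Vorbis.L.__asan_store4_noabort.entry)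
    (h_sm : ∀ (others : List Obj) (frames : List (Nat × FrameLayout)) (A : Arena),
      Calls Lay μ Vorbis.WayInv (Vorbis.conv u₀) Vorbis.L.setup_malloc.entry (Vorbis.Spec.setup_malloc.spec others frames A))
    (h_st8 : Asan.SmallCheck Lay μ Vorbis.WayInv (Vorbis.CodeOK u₀) [.rax, .rcx, .rdx] 8 Vorbis.L.__asan_store8_noabort.entry)
    (_h_ld4 : Asan.SmallCheck Lay μ Vorbis.WayInv (Vorbis.CodeOK u₀) [.rax, .rcx, .rdx] 4 Vorbis.L.__asan_load4_noabort.entry)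
    (_h_ms : ∀ (others : List Obj) (frames : List (Nat × FrameLayout)),
      Calls Lay μ Vorbis.WayInv (Vorbis.conv u₀) Vorbis.L.memset.entry (Vorbis.Spec.memset.spec others frames))
    (g : Ghost) (A : Arena × List Obj) (v : State) (n : Nat) (hb : Body9At u₀ g Vorbis.L.start_decoder.cut78 A v)
    (hn : n < 256) (hrax : v.reg .rax = UInt64.ofNat n) (hfit : ¬ A.1.Fits (2120 * (n + 1))) :
    ReachVia Lay μ WayInv v (fun w => AtC1 u₀ g w ∨ AtERR u₀ g w) := by
  have he := hb.frame.entry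
  v_entry he
  simp only [depth] at he_room he_stack
  have hlay := layout_facts hb.frame hb.hand hb.sd
  have eRA : g.RA = (g.e.reg .rsp).toNat := rfl
  have ef : g.f = (g.e.reg .rdi).toNat := rfl
  rw [eRA, ef] at hlay
  obtain ⟨hRA, hR8, _, _, hfstack, hflo, hfhi, hflog, hfcrc, hfout, hAstack, hAcrc, hAhi, hAlo⟩ := hlay
  have w_rip := hb.frame.rip
  have w_rsp : v.reg .rsp = g.e.reg .rsp - 1480 := by
    rw [hb.frame.rsp]
    apply UInt64.toNat_inj.mp
    rw [toNat_addr _ (by omega)]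
    u_omega
  have w_rbp : v.reg .rbp = g.e.reg .rdi := by
    rw [hb.rbp]
    exact addr_toNat _
  have hRw : g.e.reg .rsp - 1480 = addr g.R := by
    rw [← w_rsp]
    exact hb.frame.rsp
  have c_rsp := w_rsp
  have c_rbp := w_rbp
  have w_eq : Mem.EqOn Vorbis.L.textLo Vorbis.L.textHi u₀.mem v.mem := hb.frame.code
  have hdf : v.flags .df = false := (show abiInv _ from hb.frame.inv).1
  have hmx : v.mxcsr &&& 0x1F80 = 0x1F80 := (show abiInv _ from hb.frame.inv).2
  have hsse := Vorbis.sseOK_of_abiInv hb.frame.inv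
  have henvR : ReaderEnv A.2 g.frames' (g.Blk A) g.len g.f := readerEnv hb.hand hb.sd.env.live
  have hobjL : LiveIn A.2 g.frames' g.f Off.sizeof.stb_vorbis := hb.hand.obj.mono (sub_frames' g A)
  have w_rax := hrax
  have hsm' := h_sm A.2 g.frames' A.1
  have herr' := h_err A.2 g.frames'
  u_walk hcode [hμ.vendor] until [Vorbis.L.start_decoder.cut4] span [Vorbis.L.textLo, Vorbis.L.textHi] side (v_side)
  case check_11422a =>
    -- the store `f->codebook_count = …`: inside `*f`
    have hun : ShadowUntouched v.mem s_11422a.mem := by v_untouched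
    refine hobjL.accSmall hb.frame.shadow hun _ 4 (by decide) ?_ ?_
    · rw [ef]
      u_omega
    · rw [ef]
      simp only [Vorbis.Off.sizeof.stb_vorbis]
      u_omega
  case call_inv =>
    v_inv
  case pre_114240 =>
    -- setup_malloc(f, 2120 · count): the arena layer, after the store of `codebook_count`
    have hun : ShadowUntouched v.mem s_114240.mem := by v_untouched
    have hrsp8 : (s_114240.reg .rsp).toNat + 8 = g.R := by
      rw [w_rsp]
      u_omega
    refine ⟨⟨?_, hb.frame.offText⟩, ?_, ?_, hb.hand.arenaText⟩
    · rw [hrsp8]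
      exact hb.frame.shadow.untouched hun
    · rw [w_rdi, ← ef]
      exact hb.sd.env.live _ hb.sd.bits.OB1
    · rw [w_rdi, ← ef]
      have hs : Mem.SameExcept
          [⟨(g.e.reg .rsp).toNat - 1888, (g.e.reg .rsp).toNat - 1480⟩,
           ⟨(g.e.reg .rdi).toNat + 160, (g.e.reg .rdi).toNat + 164⟩] v.mem s_114240.mem := by
        rw [w_mem]
        u_same
      refine ArenaOK.transfer hb.sd.arena (ObjEq.of_sameExcept hs ?_ ?_)
      · intro w hw
        simp only [ArenaFields.wins, List.mem_cons, List.mem_nil_iff, or_false] at hw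
        subst hw
        simp only []
        omega
      · intro w hw s hsp
        simp only [ArenaFields.wins, List.mem_cons, List.mem_nil_iff, or_false] at hw hsp
        subst hw
        rcases hsp with rfl | rfl
        · simp only []
          omega
        · simp only []
          omega
  -- after setup_malloc (0x114245)
  v_after_call w_rsp_114240 w_mem_114240
  simp only [w_rdi_114240] at w_same
  have hsz : (s_114240.reg .rsi).toNat % 2 ^ 32 = 2120 * (n + 1) := by
    rw [w_rsi_114240, sz_toNat n hn]
    omega
  rw [hsz] at w_same
  obtain ⟨hp1, hp2⟩ := w_post
  rw [hsz, w_rdi_114240, ← ef] at hp1 hp2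
  have hbnd := (show ArenaOK A.1 A.2 v.mem g.f from hb.sd.arena).bounds
  -- the allocation failed: rax = 0, the arena and the shadow as they were
  obtain ⟨w_rax, harena1, hun_c, _⟩ := hp2 hfit
  have hunA : ShadowUntouched v.mem s_114240.mem := by
    rw [w_mem_114240]
    v_untouched
  have hun1 : ShadowUntouched v.mem s_114240r.mem :=
    fun a h1 h2 => (hun_c a h1 h2).trans (hunA a h1 h2)
  have hlt : (g.e.reg Reg.rsp - 1488).toNat + 8 ≤ 0xC00000 := by u_omega
  have hS1 : Mem.SameExcept
      [⟨(g.e.reg .rsp).toNat - 1888, (g.e.reg .rsp).toNat - 1480⟩,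
         ⟨(g.e.reg .rdi).toNat + 8, (g.e.reg .rdi).toNat + 12⟩,
         ⟨(g.e.reg .rdi).toNat + 128, (g.e.reg .rdi).toNat + 132⟩,
         ⟨(g.e.reg .rdi).toNat + 136, (g.e.reg .rdi).toNat + 144⟩,
         ⟨(g.e.reg .rdi).toNat + 160, (g.e.reg .rdi).toNat + 176⟩,
         shadowSpan (A.1.B + A.1.S + 32) (A.1.B + A.1.S + 32 + 2120 * (n + 1))] v.mem s_114240r.mem := by
    refine Vorbis.Spec.Reader.sameExcept_through_callee ?_ w_same ?_
    · u_same
    · simp only [List.forall_mem_cons, List.not_mem_nil, false_imp_iff, implies_true, and_true, X86.User.inSpans_cons,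
        X86.User.inSpans_nil, or_false, shadowSpan]
      repeat' apply And.intro
      all_goals u_omega
  u_walk hcode [hμ.vendor] until [Vorbis.L.start_decoder.cut4] span [Vorbis.L.textLo, Vorbis.L.textHi] side (v_side)
  case check_11424f =>
    -- the store `f->codebooks = NULL`: inside `*f`
    have hun' : ShadowUntouched v.mem s_11424f.mem := by
      rw [w_mem]
      exact untouched_write hun1 _ 8 _ hlt
    refine hobjL.accSmall hb.frame.shadow hun' _ 8 (by decide) ?_ ?_
    · rw [ef]
      u_omega
    · rw [ef]
      simp only [Vorbis.Off.sizeof.stb_vorbis]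
      u_omega
  case call_inv =>
    v_inv
  case pre_11442f =>
    -- error(f, 3)
    have hlt2 : (g.e.reg Reg.rdi + 168).toNat + 8 ≤ 0xC00000 := by u_omega
    have hun' : ShadowUntouched v.mem s_11442f.mem := by
      rw [w_mem]
      exact untouched_write (untouched_write (untouched_write hun1 _ 8 _ hlt) _ 8 _ hlt2) _ 8 _ hlt
    have hrsp8 : (s_11442f.reg .rsp).toNat + 8 = g.R := by
      rw [w_rsp]
      u_omega
    refine ⟨⟨?_, hb.frame.offText⟩, ?_⟩
    · rw [hrsp8]
      exact hb.frame.shadow.untouched hun'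
    · rw [w_rdi, ← ef]
      exact hobjL
  -- after error (0x114434)
  have hlt2 : (g.e.reg Reg.rdi + 168).toNat + 8 ≤ 0xC00000 := by u_omega
  have hunB : ShadowUntouched v.mem s_11442f.mem := by
    rw [w_mem_11442f]
    exact untouched_write (untouched_write (untouched_write hun1 _ 8 _ hlt) _ 8 _ hlt2) _ 8 _ hlt
  have hcb0 : s_11442f.mem.readLE (g.e.reg Reg.rdi + 168) 8 = 0 := by
    rw [w_mem_11442f]
    u_read
  v_after_call w_rsp_11442f w_mem_11442f
  simp only [w_rdi_11442f] at w_same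
  have hcbF : s_11442fr.mem.readLE (g.e.reg Reg.rdi + 168) 8 = 0 := by
    rw [w_same.readLE (g.e.reg Reg.rdi + 168) 8 (by u_omega) ?_]
    · rw [← w_mem_11442f]
      exact hcb0
    · simp only [List.forall_mem_cons, List.not_mem_nil, false_imp_iff, implies_true, and_true]
      constructor
      · u_omega
      · u_omega
  have hS2 : Mem.SameExcept
      [⟨(g.e.reg .rsp).toNat - 1888, (g.e.reg .rsp).toNat - 1480⟩,
         ⟨(g.e.reg .rdi).toNat + 8, (g.e.reg .rdi).toNat + 12⟩,
         ⟨(g.e.reg .rdi).toNat + 128, (g.e.reg .rdi).toNat + 132⟩,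
         ⟨(g.e.reg .rdi).toNat + 136, (g.e.reg .rdi).toNat + 144⟩,
         ⟨(g.e.reg .rdi).toNat + 160, (g.e.reg .rdi).toNat + 176⟩,
         shadowSpan (A.1.B + A.1.S + 32) (A.1.B + A.1.S + 32 + 2120 * (n + 1))] v.mem s_11442fr.mem := by
    refine Vorbis.Spec.Reader.sameExcept_through_callee ?_ w_same ?_
    · u_same
    · simp only [List.forall_mem_cons, List.not_mem_nil, false_imp_iff, implies_true, and_true, X86.User.inSpans_cons,
        X86.User.inSpans_nil, or_false, shadowSpan]
      repeat' apply And.intro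
      all_goals u_omega
  have hunF : ShadowUntouched v.mem s_11442fr.mem :=
    fun a h1 h2 => (w_post.2.1 a h1 h2).trans (hunB a h1 h2)
  have hS3 : Mem.SameExcept
      [⟨(g.e.reg .rsp).toNat - 1888, (g.e.reg .rsp).toNat - 1480⟩,
         ⟨(g.e.reg .rdi).toNat + 8, (g.e.reg .rdi).toNat + 12⟩,
         ⟨(g.e.reg .rdi).toNat + 128, (g.e.reg .rdi).toNat + 132⟩,
         ⟨(g.e.reg .rdi).toNat + 136, (g.e.reg .rdi).toNat + 144⟩,
         ⟨(g.e.reg .rdi).toNat + 160, (g.e.reg .rdi).toNat + 176⟩] v.mem s_11442fr.mem := by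
    refine sameExcept_drop_last hS2 ?_
    intro a h1 h2
    simp only [shadowSpan] at h1 h2
    exact hunF a (by omega) (by omega)
  have hQ : Mem.SameExcept
      [⟨(g.e.reg .rsp).toNat - 1888, (g.e.reg .rsp).toNat - 1480⟩,
       ⟨(g.e.reg .rdi).toNat + 136, (g.e.reg .rdi).toNat + 144⟩,
       ⟨(g.e.reg .rdi).toNat + 168, (g.e.reg .rdi).toNat + 176⟩] s_114240r.mem s_11442fr.mem := by
    refine Vorbis.Spec.Reader.sameExcept_through_callee ?_ w_same ?_
    · u_same
    · simp only [List.forall_mem_cons, List.not_mem_nil, false_imp_iff, implies_true, and_true, X86.User.inSpans_cons,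
        X86.User.inSpans_nil, or_false]
      repeat' apply And.intro
      all_goals u_omega
  have harenaF : ArenaOK A.1 A.2 s_11442fr.mem g.f := by
    refine ArenaOK.transfer harena1 (ObjEq.of_sameExcept hQ ?_ ?_)
    · intro w hw
      simp only [ArenaFields.wins, List.mem_cons, List.mem_nil_iff, or_false] at hw
      subst hw
      simp only []
      omega
    · intro w hw s hsp
      simp only [ArenaFields.wins, List.mem_cons, List.mem_nil_iff, or_false] at hw hsp
      subst hw
      rcases hsp with rfl | rfl | rfl
      · simp only []
        omega
      · simp only []
        omega
      · simp only []
        omega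
  have hnullF : stb_vorbis.codebooks s_11442fr.mem g.f = 0 := by
    have ea : g.e.reg Reg.rdi + 168 = addr (g.f + 168) := by
      rw [ef, ← addr_add_lit, addr_toNat]
    simp only [vacc, voff]
    unfold Mem.u64
    rw [← ea]
    exact hcbF
  have w_rax : s_11442fr.reg .rax = 0 := w_post.1
  u_walk hcode [hμ.vendor] until [Vorbis.L.start_decoder.cut4] span [Vorbis.L.textLo, Vorbis.L.textHi] side (v_side)
  refine ReachVia.done (Or.inr ?_)
  have hinvE : abiInv s_114434 := by v_inv
  have hraxE : (s_114434.reg .rax).toNat % 2 ^ 32 = 0 := by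
    rw [w_rax]
    rfl
  refine err4_exit hb (s := s_114434) (by rw [w_mem]; exact hS3) ?_ ?_ (by rw [w_mem]; exact hunF)
    (by rw [w_mem]; exact harenaF) (by rw [w_mem]; exact hnullF) w_rip (by rw [w_rsp]; exact hRw) w_eq hinvE hraxE
  · intro w hw
    simp only [List.mem_cons, List.mem_nil_iff, or_false] at hw
    unfold LateWin
    rw [ef]
    rcases hw with rfl | rfl | rfl | rfl | rfl
    all_goals simp only []
    all_goals omega
  · intro w hw
    simp only [List.mem_cons, List.mem_nil_iff, or_false] at hw
    unfold FrameWin2 FrameWin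
    simp only [depth]
    rw [eRA, ef]
    rcases hw with rfl | rfl | rfl | rfl | rfl
    all_goals simp only []
    all_goals omega

/-- The footprint of the last part of segment `.9` since `cut78`, as a literal list: the stack below the frame, the allocator's
two fields of `*f`, `codebook_count` … `codebooks`, the new block `[P, P + N)` and its shadow. -/
def lateWins (RA f P N : Nat) : List Span :=
  [⟨RA - 1888, RA - 1480⟩, ⟨f + 8, f + 12⟩, ⟨f + 128, f + 132⟩, ⟨f + 160, f + 176⟩, shadowSpan P (P + N), ⟨P, P + N⟩]

/-- **CUT ASSERTION at `cut79` = 0x114245** (the return of `setup_malloc(f, 2120 · count)` when the request fits): what the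
allocator's postcondition gives for the new ghost `(A.1.pushSetup N, A.1.newSetupObj N :: A.2)`, the footprint since the cut
assertion `Body9At` at `cut78` (state `v`), the stored `codebook_count` and the machine facts of the present state `w`. -/
structure Mid79 (u₀ : State) (g : Ghost) (A : Arena × List Obj) (n N : Nat) (v w : State) : Prop where
  rip : w.rip = Vorbis.L.start_decoder.cut79
  rsp : w.reg .rsp = g.e.reg .rsp - 1480
  rbp : w.reg .rbp = g.e.reg .rdi
  rax : w.reg .rax = addr (A.1.B + A.1.S + 32)
  same : Mem.SameExcept (lateWins (g.e.reg .rsp).toNat (g.e.reg .rdi).toNat (A.1.B + A.1.S + 32) N) v.mem w.mem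
  arena : ArenaOK (A.1.pushSetup N) (A.1.newSetupObj N :: A.2) w.mem g.f
  shadow : ShadowInv (A.1.newSetupObj N :: A.2) g.frames' g.R w.mem
  cnt : w.mem.readLE (g.e.reg .rdi + 160) 4 = n + 1
  code : CodeOK u₀ w.mem
  inv : abiInv w

/-- **Segment `.9`, part e1, THE ALLOCATION SUCCEEDS** (0x11421f … 0x114245): the store of `codebook_count` (check 0x11422a),
`setup_malloc(f, 2120 · count)` returning the new block `B + S + 32`: the cut assertion `Mid79` at `cut79`. -/
theorem seg9e1 (Lay : Layout) (hLay : Lay.hi = 0x1000000) (μ : Microarch) (hμ : UserX.MicroOK μ) (u₀ : State)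
    (hcode : HasCodeNat Lay u₀ Vorbis.L.start_decoder.entry Vorbis.Code.code_start_decoder.nat Vorbis.L.start_decoder.size)
    (h_st4 : Asan.SmallCheck Lay μ Vorbis.WayInv (Vorbis.CodeOK u₀) [.rax, .rcx, .rdx] 4 Vorbis.L.__asan_store4_noabort.entry)
    (h_sm : ∀ (others : List Obj) (frames : List (Nat × FrameLayout)) (A : Arena),
      Calls Lay μ Vorbis.WayInv (Vorbis.conv u₀) Vorbis.L.setup_malloc.entry (Vorbis.Spec.setup_malloc.spec others frames A))
    (g : Ghost) (A : Arena × List Obj) (v : State) (n : Nat) (hb : Body9At u₀ g Vorbis.L.start_decoder.cut78 A v)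
    (hn : n < 256) (hrax : v.reg .rax = UInt64.ofNat n) (N : Nat) (hN : N = 2120 * (n + 1)) (hfit : A.1.Fits N) :
    ReachVia Lay μ WayInv v (fun w => Mid79 u₀ g A n N v w) := by
  have he := hb.frame.entry
  v_entry he
  simp only [depth] at he_room he_stack
  have hlay := layout_facts hb.frame hb.hand hb.sd
  have eRA : g.RA = (g.e.reg .rsp).toNat := rfl
  have ef : g.f = (g.e.reg .rdi).toNat := rfl
  rw [eRA, ef] at hlay
  obtain ⟨hRA, hR8, _, _, hfstack, hflo, hfhi, hflog, hfcrc, hfout, hAstack, hAcrc, hAhi, hAlo⟩ := hlay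
  have w_rip := hb.frame.rip
  have w_rsp : v.reg .rsp = g.e.reg .rsp - 1480 := by
    rw [hb.frame.rsp]
    apply UInt64.toNat_inj.mp
    rw [toNat_addr _ (by omega)]
    u_omega
  have w_rbp : v.reg .rbp = g.e.reg .rdi := by
    rw [hb.rbp]
    exact addr_toNat _
  have hRw : g.e.reg .rsp - 1480 = addr g.R := by
    rw [← w_rsp]
    exact hb.frame.rsp
  have c_rsp := w_rsp
  have c_rbp := w_rbp
  have w_eq : Mem.EqOn Vorbis.L.textLo Vorbis.L.textHi u₀.mem v.mem := hb.frame.code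
  have hdf : v.flags .df = false := (show abiInv _ from hb.frame.inv).1
  have hmx : v.mxcsr &&& 0x1F80 = 0x1F80 := (show abiInv _ from hb.frame.inv).2
  have hsse := Vorbis.sseOK_of_abiInv hb.frame.inv
  have henvR : ReaderEnv A.2 g.frames' (g.Blk A) g.len g.f := readerEnv hb.hand hb.sd.env.live
  have hobjL : LiveIn A.2 g.frames' g.f Off.sizeof.stb_vorbis := hb.hand.obj.mono (sub_frames' g A)
  have w_rax := hrax
  have hsm' := h_sm A.2 g.frames' A.1
  u_walk hcode [hμ.vendor] until [Vorbis.L.start_decoder.cut4] span [Vorbis.L.textLo, Vorbis.L.textHi] side (v_side)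
  case check_11422a =>
    -- the store `f->codebook_count = …`: inside `*f`
    have hun : ShadowUntouched v.mem s_11422a.mem := by v_untouched
    refine hobjL.accSmall hb.frame.shadow hun _ 4 (by decide) ?_ ?_
    · rw [ef]
      u_omega
    · rw [ef]
      simp only [Vorbis.Off.sizeof.stb_vorbis]
      u_omega
  case call_inv =>
    v_inv
  case pre_114240 =>
    -- setup_malloc(f, 2120 · count): the arena layer, after the store of `codebook_count`
    have hun : ShadowUntouched v.mem s_114240.mem := by v_untouched
    have hrsp8 : (s_114240.reg .rsp).toNat + 8 = g.R := by
      rw [w_rsp]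
      u_omega
    refine ⟨⟨?_, hb.frame.offText⟩, ?_, ?_, hb.hand.arenaText⟩
    · rw [hrsp8]
      exact hb.frame.shadow.untouched hun
    · rw [w_rdi, ← ef]
      exact hb.sd.env.live _ hb.sd.bits.OB1
    · rw [w_rdi, ← ef]
      have hs : Mem.SameExcept
          [⟨(g.e.reg .rsp).toNat - 1888, (g.e.reg .rsp).toNat - 1480⟩,
           ⟨(g.e.reg .rdi).toNat + 160, (g.e.reg .rdi).toNat + 164⟩] v.mem s_114240.mem := by
        rw [w_mem]
        u_same
      refine ArenaOK.transfer hb.sd.arena (ObjEq.of_sameExcept hs ?_ ?_)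
      · intro w hw
        simp only [ArenaFields.wins, List.mem_cons, List.mem_nil_iff, or_false] at hw
        subst hw
        simp only []
        omega
      · intro w hw s hsp
        simp only [ArenaFields.wins, List.mem_cons, List.mem_nil_iff, or_false] at hw hsp
        subst hw
        rcases hsp with rfl | rfl
        · simp only []
          omega
        · simp only []
          omega
  -- after setup_malloc (0x114245)
  v_after_call w_rsp_114240 w_mem_114240
  simp only [w_rdi_114240] at w_same
  have hNle : N ≤ 542720 := by
    rw [hN]
    omega
  have hsz : (s_114240.reg .rsi).toNat % 2 ^ 32 = N := by
    rw [w_rsi_114240, sz_toNat n hn, ← hN]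
    omega
  rw [hsz] at w_same
  obtain ⟨hp1, hp2⟩ := w_post
  rw [hsz, w_rdi_114240, ← ef] at hp1 hp2
  have hbnd := (show ArenaOK A.1 A.2 v.mem g.f from hb.sd.arena).bounds
  -- the allocation succeeded: rax = B + S + 32, the new ghost arena, the new block one more live object
  obtain ⟨hraxN, harena1, hsh1⟩ := hp1 hfit
  have hrsp8 : (s_114240.reg .rsp).toNat + 8 = g.R := by
    rw [w_rsp_114240]
    u_omega
  rw [hrsp8] at hsh1
  have hfitN : A.1.S + 32 + r8 (N) ≤ A.1.T := hfit
  have hle8 := le_r8 (N)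
  have w_rax : s_114240r.reg .rax = addr (A.1.B + A.1.S + 32) := eq_addr _ _ hraxN
  have hcnt0 : s_114240.mem.readLE (g.e.reg Reg.rdi + 160) 4 = n + 1 := by
    rw [w_mem_114240, ← cnt_toNat n hn]
    u_read
  have hcnt1 : s_114240r.mem.readLE (g.e.reg Reg.rdi + 160) 4 = n + 1 := by
    rw [w_same.readLE (g.e.reg Reg.rdi + 160) 4 (by u_omega) ?_]
    · rw [← w_mem_114240]
      exact hcnt0
    · simp only [List.forall_mem_cons, List.not_mem_nil, false_imp_iff, implies_true, and_true, shadowSpan]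
      repeat' apply And.intro
      all_goals u_omega
  have hS1 : Mem.SameExcept
      [⟨(g.e.reg .rsp).toNat - 1888, (g.e.reg .rsp).toNat - 1480⟩,
         ⟨(g.e.reg .rdi).toNat + 8, (g.e.reg .rdi).toNat + 12⟩,
         ⟨(g.e.reg .rdi).toNat + 128, (g.e.reg .rdi).toNat + 132⟩,
         ⟨(g.e.reg .rdi).toNat + 160, (g.e.reg .rdi).toNat + 176⟩,
         shadowSpan (A.1.B + A.1.S + 32) (A.1.B + A.1.S + 32 + N),
         ⟨A.1.B + A.1.S + 32, A.1.B + A.1.S + 32 + N⟩] v.mem s_114240r.mem := by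
    refine Vorbis.Spec.Reader.sameExcept_through_callee ?_ w_same ?_
    · u_same
    · simp only [List.forall_mem_cons, List.not_mem_nil, false_imp_iff, implies_true, and_true, X86.User.inSpans_cons,
        X86.User.inSpans_nil, or_false, shadowSpan]
      repeat' apply And.intro
      all_goals u_omega
  refine ReachVia.done ?_
  exact
    { rip := w_rip
      rsp := w_rsp
      rbp := by rw [w_kept .rbp rfl]; exact c_rbp
      rax := w_rax
      same := hS1
      arena := harena1
      shadow := hsh1
      cnt := hcnt1
      code := w_eq
      inv := w_inv }

/-- **The footprint of the last part of segment `.9` is made of allowed windows** (`LateWin` for what survives of `SD 2`,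
`FrameWin2` for the common part `Frame`): pure arithmetic from `layout_facts`, AR2 and the fit of the request, proved HERE
in a small context (inside the walk `omega` has every disjunction of the context to split on). -/
theorem lateWins_ok {u₀ : State} {g : Ghost} {pc : Word} {A : Arena × List Obj} {v : State}
    (hb : Body9At u₀ g pc A v) (N : Nat) (hfit : A.1.Fits N) :
    ∀ w, w ∈ lateWins (g.e.reg .rsp).toNat (g.e.reg .rdi).toNat (A.1.B + A.1.S + 32) N →
      LateWin A.1 g.f g.R w ∧ FrameWin2 g w := by
  have hlay := layout_facts hb.frame hb.hand hb.sd
  have eRA : g.RA = (g.e.reg .rsp).toNat := rfl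
  have ef : g.f = (g.e.reg .rdi).toNat := rfl
  rw [eRA, ef] at hlay
  obtain ⟨hRA, hR8, hs1, hs2, hfstack, hflo, hfhi, hflog, hfcrc, hfout, hAstack, hAcrc, hAhi, hAlo⟩ := hlay
  have hbnd := (show ArenaOK A.1 A.2 v.mem g.f from hb.sd.arena).bounds
  have hfitN : A.1.S + 32 + r8 N ≤ A.1.T := hfit
  have hle8 := le_r8 N
  have eB := hb.frame.ext.B
  have eL := hb.frame.ext.L
  have hlog := hb.hand.outside ⟨0x120640, 16⟩ (by simp only [fixedBlocks, globalBlocks, List.mem_cons, true_or, or_true])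
  simp only [] at hlog
  intro w hw
  simp only [lateWins, List.mem_cons, List.mem_nil_iff, or_false] at hw
  constructor
  · unfold LateWin
    rw [ef]
    rcases hw with rfl | rfl | rfl | rfl | rfl | rfl
    all_goals simp only [shadowSpan]
    all_goals omega
  · unfold FrameWin2 FrameWin
    simp only [depth]
    rw [eRA, ef]
    rcases hw with rfl | rfl | rfl | rfl | rfl | rfl
    all_goals simp only [shadowSpan]
    all_goals omega

/-- **Segment `.9`, part e2** (0x114245 … 0x11428b): the store of `codebooks` (check 0x11424f, under the allocator's new shadow
layer), the NULL test (not taken: the block is `B + S + 32`), the re-load of the count (check 0x11426b),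
`memset(codebooks, 0, 2120 · count)` up to its return: what the exit lemma `c1_exit` needs, as facts about the returned state. -/
theorem seg9e2 (Lay : Layout) (hLay : Lay.hi = 0x1000000) (μ : Microarch) (hμ : UserX.MicroOK μ) (u₀ : State)
    (hcode : HasCodeNat Lay u₀ Vorbis.L.start_decoder.entry Vorbis.Code.code_start_decoder.nat Vorbis.L.start_decoder.size)
    (h_st8 : Asan.SmallCheck Lay μ Vorbis.WayInv (Vorbis.CodeOK u₀) [.rax, .rcx, .rdx] 8 Vorbis.L.__asan_store8_noabort.entry)
    (h_ld4 : Asan.SmallCheck Lay μ Vorbis.WayInv (Vorbis.CodeOK u₀) [.rax, .rcx, .rdx] 4 Vorbis.L.__asan_load4_noabort.entry)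
    (h_ms : ∀ (others : List Obj) (frames : List (Nat × FrameLayout)),
      Calls Lay μ Vorbis.WayInv (Vorbis.conv u₀) Vorbis.L.memset.entry (Vorbis.Spec.memset.spec others frames))
    (g : Ghost) (A : Arena × List Obj) (v w : State) (n : Nat) (hb : Body9At u₀ g Vorbis.L.start_decoder.cut78 A v)
    (hn : n < 256) (N : Nat) (hN : N = 2120 * (n + 1)) (hfit : A.1.Fits N) (hm : Mid79 u₀ g A n N v w) :
    ReachVia Lay μ WayInv w (fun s => AtC1 u₀ g s ∨ AtERR u₀ g s) := by
  have he := hb.frame.entry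
  v_entry he
  simp only [depth] at he_room he_stack
  have hlay := layout_facts hb.frame hb.hand hb.sd
  have eRA : g.RA = (g.e.reg .rsp).toNat := rfl
  have ef : g.f = (g.e.reg .rdi).toNat := rfl
  rw [eRA, ef] at hlay
  obtain ⟨hRA, hR8, _, _, hfstack, hflo, hfhi, hflog, hfcrc, hfout, hAstack, hAcrc, hAhi, hAlo⟩ := hlay
  have w_rip := hm.rip
  have c_rsp : w.reg .rsp = g.e.reg .rsp - 1480 := hm.rsp
  have c_rbp : w.reg .rbp = g.e.reg .rdi := hm.rbp
  have c_rax : w.reg .rax = addr (A.1.B + A.1.S + 32) := hm.rax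
  have hRw : g.e.reg .rsp - 1480 = addr g.R := by
    rw [← hb.frame.rsp]
    have h1 : v.reg .rsp = g.e.reg .rsp - 1480 := by
      rw [hb.frame.rsp]
      apply UInt64.toNat_inj.mp
      rw [toNat_addr _ (by omega)]
      u_omega
    exact h1.symm
  have w_kept : RegsKept [.rsp] w w := RegsKept.refl _ _
  have w_eq : Mem.EqOn Vorbis.L.textLo Vorbis.L.textHi u₀.mem w.mem := hm.code
  have hdf : w.flags .df = false := (show abiInv _ from hm.inv).1
  have hmx : w.mxcsr &&& 0x1F80 = 0x1F80 := (show abiInv _ from hm.inv).2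
  have hsse := Vorbis.sseOK_of_abiInv hm.inv
  have hobjL : LiveIn A.2 g.frames' g.f Off.sizeof.stb_vorbis := hb.hand.obj.mono (sub_frames' g A)
  have hNle : N ≤ 542720 := by
    rw [hN]
    omega
  have hbnd := (show ArenaOK A.1 A.2 v.mem g.f from hb.sd.arena).bounds
  have hsh1 := hm.shadow
  have hfitN : A.1.S + 32 + r8 (N) ≤ A.1.T := hfit
  have hle8 := le_r8 (N)
  have hPlt : A.1.B + A.1.S + 32 < 2 ^ 64 := by omega
  have hPto : (addr (A.1.B + A.1.S + 32)).toNat = A.1.B + A.1.S + 32 := toNat_addr _ hPlt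
  have hcnt1 : w.mem.readLE (g.e.reg Reg.rdi + 160) 4 = n + 1 := hm.cnt
  have hms' := h_ms (A.1.newSetupObj (N) :: A.2) g.frames'
  have hlt : (g.e.reg Reg.rsp - 1488).toNat + 8 ≤ 0xC00000 := by u_omega
  have hlt2 : (g.e.reg Reg.rdi + 168).toNat + 8 ≤ 0xC00000 := by u_omega
  have hsubO : ∀ o, o ∈ stackObjs g.frames' ++ A.2 →
      o ∈ stackObjs g.frames' ++ (A.1.newSetupObj (N) :: A.2) := by
    intro o ho
    rcases List.mem_append.mp ho with h1 | h2
    · exact List.mem_append_left _ h1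
    · exact List.mem_append_right _ (List.mem_cons_of_mem _ h2)
  have hobjL' : LiveIn (A.1.newSetupObj (N) :: A.2) g.frames' g.f Off.sizeof.stb_vorbis :=
    hobjL.mono hsubO
  have hoffT : ∀ o, o ∈ A.1.newSetupObj (N) :: A.2 → L.textHi ≤ o.base := by
    intro o ho
    rcases List.mem_cons.mp ho with rfl | hm'
    · have eb : (A.1.newSetupObj (N)).base = A.1.B + (A.1.S + 32) := rfl
      have := hb.hand.arenaText
      omega
    · exact hb.frame.offText o hm'
  u_walk hcode [hμ.vendor] until [Vorbis.L.start_decoder.cut4] span [Vorbis.L.textLo, Vorbis.L.textHi] side (v_side)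
  case check_11424f =>
    -- the store `f->codebooks = …`: inside `*f`, under the allocator's new shadow layer
    have hun' : ShadowUntouched w.mem s_11424f.mem := by
      rw [w_mem]
      exact untouched_write (fun _ _ _ => rfl) _ 8 _ hlt
    refine hobjL'.accSmall hsh1 hun' _ 8 (by decide) ?_ ?_
    · rw [ef]
      u_omega
    · rw [ef]
      simp only [Vorbis.Off.sizeof.stb_vorbis]
      u_omega
  case check_11426b =>
    -- the load of `f->codebook_count`
    have hun' : ShadowUntouched w.mem s_11426b.mem := by
      rw [w_mem]
      refine untouched_write ?_ _ 8 _ hlt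
      refine untouched_write ?_ _ 8 _ hlt2
      refine untouched_write ?_ _ 8 _ hlt
      exact fun _ _ _ => rfl
    refine hobjL'.accSmall hsh1 hun' _ 4 (by decide) ?_ ?_
    · rw [ef]
      u_omega
    · rw [ef]
      simp only [Vorbis.Off.sizeof.stb_vorbis]
      u_omega
  case call_inv =>
    v_inv
  case pre_114286 =>
    -- memset(codebooks, 0, 2120 · count): the block the allocator returned is ONE live object
    have hun' : ShadowUntouched w.mem s_114286.mem := by
      rw [w_mem]
      refine untouched_write ?_ _ 8 _ hlt
      refine untouched_write ?_ _ 8 _ hlt2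
      refine untouched_write ?_ _ 8 _ hlt
      exact fun _ _ _ => rfl
    have hrsp8' : (s_114286.reg .rsp).toNat + 8 = g.R := by
      rw [w_rsp]
      u_omega
    refine ⟨⟨?_, hoffT⟩, Or.inr ?_⟩
    · rw [hrsp8']
      exact hsh1.untouched hun'
    · have e1 : (s_114286.reg .rdi).toNat = A.1.B + A.1.S + 32 := by
        rw [w_rdi]
        exact hPto
      have e2 : (s_114286.reg .rdx).toNat = N := by
        rw [w_rdx, rdx_toNat n hn, hN]
      rw [e1, e2]
      have eb : (A.1.newSetupObj (N)).base = A.1.B + (A.1.S + 32) := rfl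
      have es : (A.1.newSetupObj (N)).size = N := rfl
      refine ⟨A.1.newSetupObj (N), List.mem_append_right _ List.mem_cons_self, ?_, ?_⟩
      · rw [eb]
        omega
      · rw [eb, es, Nat.add_assoc A.1.B]
        exact Nat.le_refl _
  -- after memset (0x11428b): the exit to part C
  have hunP : ShadowUntouched w.mem s_114286.mem := by
    rw [w_mem_114286]
    refine untouched_write ?_ _ 8 _ hlt
    refine untouched_write ?_ _ 8 _ hlt2
    refine untouched_write ?_ _ 8 _ hlt
    exact fun _ _ _ => rfl
  have hcbS : s_114286.mem.readLE (g.e.reg Reg.rdi + 168) 8 = A.1.B + A.1.S + 32 := by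
    have h0 : s_114286.mem.readLE (g.e.reg Reg.rdi + 168) 8 = (addr (A.1.B + A.1.S + 32)).toNat := by
      rw [w_mem_114286]
      u_read
    rw [hPto] at h0
    exact h0
  have hcntS : s_114286.mem.readLE (g.e.reg Reg.rdi + 160) 4 = n + 1 := by
    rw [w_mem_114286]
    u_frame hcnt1
  v_after_call w_rsp_114286 w_mem_114286
  have e1 : (s_114286.reg .rdi).toNat = A.1.B + A.1.S + 32 := by
    rw [w_rdi_114286]
    exact hPto
  have e2 : (s_114286.reg .rdx).toNat = N := by
    rw [w_rdx_114286, rdx_toNat n hn, hN]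
  simp only [e1, e2] at w_same
  obtain ⟨_, hunM, hfill⟩ := w_post
  have hPN : A.1.B + A.1.S + 32 + N ≤ A.1.B + A.1.L := by omega
  have t160 : (g.e.reg Reg.rdi + 160).toNat = (g.e.reg .rdi).toNat + 160 := by u_omega
  have t168 : (g.e.reg Reg.rdi + 168).toNat = (g.e.reg .rdi).toNat + 168 := by u_omega
  have tsp : (g.e.reg Reg.rsp - 1488).toNat = (g.e.reg .rsp).toNat - 1488 := by u_omega
  have hcbF : s_114286r.mem.readLE (g.e.reg Reg.rdi + 168) 8 = A.1.B + A.1.S + 32 := by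
    rw [w_same.readLE (g.e.reg Reg.rdi + 168) 8 (by rw [t168]; omega) ?_]
    · rw [← w_mem_114286]
      exact hcbS
    · simp only [List.forall_mem_cons, List.not_mem_nil, false_imp_iff, implies_true, and_true, t168, tsp]
      constructor
      · omega
      · omega
  have hcntF : s_114286r.mem.readLE (g.e.reg Reg.rdi + 160) 4 = n + 1 := by
    rw [w_same.readLE (g.e.reg Reg.rdi + 160) 4 (by rw [t160]; omega) ?_]
    · rw [← w_mem_114286]
      exact hcntS
    · simp only [List.forall_mem_cons, List.not_mem_nil, false_imp_iff, implies_true, and_true, t160, tsp]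
      constructor
      · omega
      · omega
  have hQ : Mem.SameExcept
      [⟨(g.e.reg .rsp).toNat - 1888, (g.e.reg .rsp).toNat - 1480⟩,
       ⟨(g.e.reg .rdi).toNat + 168, (g.e.reg .rdi).toNat + 176⟩,
       ⟨A.1.B + A.1.S + 32, A.1.B + A.1.S + 32 + N⟩] w.mem s_114286r.mem := by
    refine Vorbis.Spec.Reader.sameExcept_through_callee ?_ w_same ?_
    · u_same
    · simp only [List.forall_mem_cons, List.not_mem_nil, false_imp_iff, implies_true, and_true, X86.User.inSpans_cons,
        X86.User.inSpans_nil, or_false]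
      rw [tsp]
      refine ⟨Or.inl ⟨?_, ?_⟩, Or.inr (Or.inr ⟨Nat.le_refl _, ?_⟩)⟩
      · omega
      · omega
      · omega
  have hS2 : Mem.SameExcept
      [⟨(g.e.reg .rsp).toNat - 1888, (g.e.reg .rsp).toNat - 1480⟩,
         ⟨(g.e.reg .rdi).toNat + 8, (g.e.reg .rdi).toNat + 12⟩,
         ⟨(g.e.reg .rdi).toNat + 128, (g.e.reg .rdi).toNat + 132⟩,
         ⟨(g.e.reg .rdi).toNat + 160, (g.e.reg .rdi).toNat + 176⟩,
         shadowSpan (A.1.B + A.1.S + 32) (A.1.B + A.1.S + 32 + N),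
         ⟨A.1.B + A.1.S + 32, A.1.B + A.1.S + 32 + N⟩] v.mem s_114286r.mem := by
    refine Vorbis.Spec.Reader.sameExcept_through_callee hm.same hQ ?_
    simp only [List.forall_mem_cons, List.not_mem_nil, false_imp_iff, implies_true, and_true, X86.User.inSpans_cons,
      X86.User.inSpans_nil, or_false, shadowSpan]
    refine ⟨Or.inl ⟨?_, ?_⟩, Or.inr (Or.inr (Or.inr (Or.inl ⟨?_, ?_⟩))),
      Or.inr (Or.inr (Or.inr (Or.inr (Or.inr ⟨?_, ?_⟩))))⟩
    all_goals omega
  have hunF : ShadowUntouched w.mem s_114286r.mem :=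
    fun a h1 h2 => (hunM a h1 h2).trans (hunP a h1 h2)
  have hshF := hsh1.untouched hunF
  have harenaF : ArenaOK (A.1.pushSetup (N)) (A.1.newSetupObj (N) :: A.2)
      s_114286r.mem g.f := by
    refine ArenaOK.transfer hm.arena (ObjEq.of_sameExcept hQ ?_ ?_)
    · intro w hw
      simp only [ArenaFields.wins, List.mem_cons, List.mem_nil_iff, or_false] at hw
      subst hw
      simp only []
      omega
    · intro w hw s hsp
      simp only [ArenaFields.wins, List.mem_cons, List.mem_nil_iff, or_false] at hw hsp
      subst hw
      rcases hsp with rfl | rfl | rfl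
      · simp only []
        omega
      · simp only []
        omega
      · simp only []
        omega
  have ea160 : g.e.reg Reg.rdi + 160 = addr (g.f + 160) := by
    rw [ef, ← addr_add_lit, addr_toNat]
  have ea168 : g.e.reg Reg.rdi + 168 = addr (g.f + 168) := by
    rw [ef, ← addr_add_lit, addr_toNat]
  have hcnt : s_114286r.mem.u32 (g.f + 160) = n + 1 := by
    unfold Mem.u32
    rw [← ea160]
    exact hcntF
  have hcb : s_114286r.mem.u64 (g.f + 168) = A.1.B + A.1.S + 32 := by
    unfold Mem.u64
    rw [← ea168]
    exact hcbF
  have hzero : ZeroFill s_114286r.mem (A.1.B + A.1.S + 32) (N) := by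
    intro j hj
    unfold Mem.u8
    have h0 := hfill j (by rw [e2]; exact hj)
    rw [w_rdi_114286, w_rsi_114286, addr_add] at h0
    exact h0
  have hinvF : abiInv s_114286r := by v_inv
  have hrbpF : s_114286r.reg .rbp = addr g.f := by
    rw [w_kept .rbp rfl, c_rbp, ef]
    exact (addr_toNat _).symm
  have hwin := lateWins_ok hb N hfit
  refine ReachVia.done (Or.inl ?_)
  subst hN
  exact c1_exit n hb hn hfit hS2 (fun x hx => (hwin x hx).1) (fun x hx => (hwin x hx).2) hshF harenaF hcnt hcb hzero w_rip (by rw [w_rsp]; exact hRw) w_eq hinvF hrbpF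

end Vorbis.Spec.start_decoder_9
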